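-- pv_equiv track=rewrite | github.com/gh0stintheshe11/LeetCode-Solutions | solutions/2852.sum-of-remoteness-of-all-cells/Python3.py | sumRemoteness
-- ===== SOURCE A (Python) =====
-- from collections import deque
--
-- def sumRemoteness(grid):
--     n = len(grid)
--     visited = [[False] * n for _ in range(n)]
--     total_sum = 0
--
--     def bfs(i, j):
--         queue = deque([(i, j)])
--         visited[i][j] = True
--         component = []
--         component_sum = 0
--
--         while queue:
--             x, y = queue.popleft()
--             component.append((x, y))
--             component_sum += grid[x][y]
--
--             for dx, dy in [(-1, 0), (1, 0), (0, -1), (0, 1)]: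
--                 nx, ny = x + dx, y + dy
--                 if 0 <= nx < n and 0 <= ny < n and grid[nx][ny] != -1 and not visited[nx][ny]:
--                     queue.append((nx, ny))
--                     visited[nx][ny] = True
--
--         return component, component_sum
--
--     component_sums = []
--     for i in range(n):
--         for j in range(n):
--             if grid[i][j] != -1 and not visited[i][j]:
--                 component, comp_sum = bfs(i, j)
--                 component_sums.append((component, comp_sum))
--
--     grid_sum = sum(grid[i][j] for i in range(n) for j in range(n) if grid[i][j] != -1)
--
--     for component, comp_sum in component_sums:
--         remoteness_value = grid_sum - comp_sum
--         for x, y in component: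
--             total_sum += remoteness_value
--
--     return total_sum
-- ===== SOURCE B (Python) =====
-- def sumRemoteness(grid):
--     # Union-find over cell ids instead of BFS flood fill (alternative algorithm).
--     n = len(grid)
--     N = n * n
--     parent = list(range(N))
--     csum = [0] * N
--     S = 0
--     for i in range(n):
--         for j in range(n):
--             if grid[i][j] != -1:
--                 k = i * n + j
--                 csum[k] = grid[i][j]
--                 S += grid[i][j]
--
--     def find(x):
--         while parent[x] != x:
--             x = parent[x]
--         return x
--
--     def union(a, b):
--         ra, rb = find(a), find(b)
--         if ra == rb:
--             return
--         if ra > rb: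
--             ra, rb = rb, ra
--         parent[rb] = ra
--         csum[ra] += csum[rb]
--
--     for i in range(n):
--         for j in range(n):
--             if grid[i][j] != -1:
--                 k = i * n + j
--                 if i + 1 < n and grid[i + 1][j] != -1:
--                     union(k, k + n)
--                 if j + 1 < n and grid[i][j + 1] != -1:
--                     union(k, k + 1)
--
--     total = 0
--     for i in range(n):
--         for j in range(n):
--             if grid[i][j] != -1:
--                 total += S - csum[find(i * n + j)]
--     return total
-- ===== Notes on version B (the rewrite author's own statement) =====
-- stated objective: alternative
-- what changed: Replaced BFS flood fill with visited matrix and per-component cell lists by a union-find over cell ids: each free cell is unioned with its right/down free neighbor while a per-root value sum is maintained, and the answer is accumulated per cell as grid_sum minus the sum stored at the cell's root.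
import Mathlib
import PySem

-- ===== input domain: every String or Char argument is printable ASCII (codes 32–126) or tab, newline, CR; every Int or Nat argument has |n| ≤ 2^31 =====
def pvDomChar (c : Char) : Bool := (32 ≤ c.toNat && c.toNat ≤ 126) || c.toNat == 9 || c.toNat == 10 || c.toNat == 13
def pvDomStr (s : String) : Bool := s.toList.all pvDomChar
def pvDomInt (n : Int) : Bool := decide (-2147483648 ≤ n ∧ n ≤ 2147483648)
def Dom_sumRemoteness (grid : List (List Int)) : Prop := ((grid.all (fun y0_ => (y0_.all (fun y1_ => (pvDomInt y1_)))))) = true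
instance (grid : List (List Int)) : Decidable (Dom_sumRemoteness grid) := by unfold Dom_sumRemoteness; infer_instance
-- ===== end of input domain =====

-- B replaces A's BFS flood fill by a union-find over cell ids (alternative algorithm, similar cost);
-- A mutates nothing observable; equivalence is about the return value on square-shaped inputs (Pre_).

-- ===== PORT A =====
-- grid value at (Nat) coordinates; every use in both ports is guarded by 0 ≤ coord < len(grid) ≤ row length, where getD is exact
def pvValN (g : List (List Int)) (i j : Nat) : Int := (g.getD i []).getD j 0
-- grid value at Int coordinates (guarded nonnegative and < n at every use, so toNat is exact)
def pvVal (g : List (List Int)) (x y : Int) : Int := pvValN g x.toNat y.toNat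
-- visited-matrix read/write (guarded in-range at every use)
def pvMget (v : List (List Bool)) (a b : Nat) : Bool := (v.getD a []).getD b false
def pvMset (v : List (List Bool)) (a b : Nat) : List (List Bool) := v.set a ((v.getD a []).set b true)

def pvDirs : List (Int × Int) := [(-1, 0), (1, 0), (0, -1), (0, 1)]

-- inner `for dx, dy in [...]` loop of bfs: conditionally enqueue + mark each neighbor
def pvScan (g : List (List Int)) (n : Nat) (x y : Int)
    (st : List (Int × Int) × List (List Bool)) : List (Int × Int) × List (List Bool) :=
  pvDirs.foldl (fun st d =>
    if 0 ≤ x + d.1 ∧ x + d.1 < (n : Int) ∧ 0 ≤ y + d.2 ∧ y + d.2 < (n : Int) ∧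
        pvVal g (x + d.1) (y + d.2) ≠ -1 ∧
        pvMget st.2 (x + d.1).toNat (y + d.2).toNat = false then
      (st.1 ++ [(x + d.1, y + d.2)], pvMset st.2 (x + d.1).toNat (y + d.2).toNat)
    else st) st

-- the `while queue:` loop; fuel n*n is enough: each pop matches an enqueue, and every enqueue marks a
-- previously-unmarked cell of the n×n visited matrix (proved in the claim, not assumed)
def pvBfsLoop (g : List (List Int)) (n : Nat) :
    Nat → List (Int × Int) → List (List Bool) → List (Int × Int) → Int →
    List (Int × Int) × Int × List (List Bool)
  | _, [], vis, comp, cs => (comp, cs, vis)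
  | 0, _ :: _, vis, comp, cs => (comp, cs, vis)
  | fuel + 1, (x, y) :: qt, vis, comp, cs =>
      let p := pvScan g n x y (qt, vis)
      pvBfsLoop g n fuel p.1 p.2 (comp ++ [(x, y)]) (cs + pvVal g x y)

def pvBfs (g : List (List Int)) (n : Nat) (i j : Nat) (vis : List (List Bool)) :
    List (Int × Int) × Int × List (List Bool) :=
  pvBfsLoop g n (n * n) [((i : Int), (j : Int))] (pvMset vis i j) [] 0

-- outer double loop collecting (component, comp_sum) pairs while threading `visited`
def pvOuter (g : List (List Int)) (n : Nat) :
    List (List Bool) × List (List (Int × Int) × Int) :=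
  (List.range n).foldl (fun st i =>
    (List.range n).foldl (fun st j =>
      if pvValN g i j ≠ -1 ∧ pvMget st.1 i j = false then
        let r := pvBfs g n i j st.1
        (r.2.2, st.2 ++ [(r.1, r.2.1)])
      else st) st) (List.replicate n (List.replicate n false), [])

def pvGridSum (g : List (List Int)) (n : Nat) : Int :=
  (List.range n).foldl (fun s i =>
    (List.range n).foldl (fun s j =>
      if pvValN g i j ≠ -1 then s + pvValN g i j else s) s) 0

def sumRemoteness (grid : List (List Int)) : Int :=
  let n := grid.length
  let o := pvOuter grid n
  let gs := pvGridSum grid n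
  o.2.foldl (fun t c => c.1.foldl (fun t _ => t + (gs - c.2)) t) 0

-- ===== PORT B =====
-- `while parent[x] != x: x = parent[x]`; fuel x is enough since parent[y] ≤ y always holds
def pvFind (p : List Nat) : Nat → Nat → Nat
  | 0, x => x
  | fuel + 1, x =>
      let px := p.getD x x
      if px = x then x else pvFind p fuel px

def pvFindR (p : List Nat) (x : Nat) : Nat := pvFind p x x

-- union(a, b): link the larger root under the smaller, folding the value sum into the surviving root
def pvUnion (st : List Nat × List Int) (a b : Nat) : List Nat × List Int :=
  let ra := pvFindR st.1 a
  let rb := pvFindR st.1 b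
  if ra = rb then st
  else
    let r1 := min ra rb
    let r2 := max ra rb
    (st.1.set r2 r1, st.2.set r1 (st.2.getD r1 0 + st.2.getD r2 0))

-- first double loop: per-cell csum initialisation and the total S
def pvInit (g : List (List Int)) (n : Nat) : List Int × Int :=
  (List.range n).foldl (fun st i =>
    (List.range n).foldl (fun (st : List Int × Int) j =>
      if pvValN g i j ≠ -1 then
        (st.1.set (i * n + j) (pvValN g i j), st.2 + pvValN g i j)
      else st) st) (List.replicate (n * n) 0, 0)

-- second double loop: union each free cell with its free right/down neighbor
def pvUF (g : List (List Int)) (n : Nat) (cs0 : List Int) : List Nat × List Int :=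
  (List.range n).foldl (fun st i =>
    (List.range n).foldl (fun (st : List Nat × List Int) j =>
      if pvValN g i j ≠ -1 then
        let k := i * n + j
        let st1 := if i + 1 < n ∧ pvValN g (i + 1) j ≠ -1 then pvUnion st k (k + n) else st
        if j + 1 < n ∧ pvValN g i (j + 1) ≠ -1 then pvUnion st1 k (k + 1) else st1
      else st) st) (List.range (n * n), cs0)

def sumRemoteness_alt (grid : List (List Int)) : Int :=
  let n := grid.length
  let init := pvInit grid n
  let uf := pvUF grid n init.1
  (List.range n).foldl (fun t i =>
    (List.range n).foldl (fun t j =>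
      if pvValN grid i j ≠ -1 then
        t + (init.2 - uf.2.getD (pvFindR uf.1 (i * n + j)) 0)
      else t) t) 0

-- ===== PRECONDITION & SPEC =====
-- A raises IndexError iff some row is shorter than len(grid) (so does B); those inputs are excluded.
def Pre_sumRemoteness (grid : List (List Int)) : Prop :=
  ∀ row ∈ grid, grid.length ≤ row.length
instance (grid : List (List Int)) : Decidable (Pre_sumRemoteness grid) := by
  unfold Pre_sumRemoteness; infer_instance
def pvWitness_sumRemoteness : List (List Int) := [[1, -1], [2, 3]]

def Spec_sumRemoteness (grid : List (List Int)) (out : Int) : Prop := out = sumRemoteness_alt grid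
instance (grid : List (List Int)) (out : Int) : Decidable (Spec_sumRemoteness grid out) := by unfold Spec_sumRemoteness; infer_instance

-- ===== CLAIM (what is proved, stated in full; the proofs are below) =====
def Claim_equal_sumRemoteness : Prop := ∀ (grid : List (List Int)), Dom_sumRemoteness grid → Pre_sumRemoteness grid → Spec_sumRemoteness grid (sumRemoteness grid)

-- ===== LEMMAS AND PROOFS =====

-- ---------- semantic layer: cells, adjacency, connectivity ----------

def pvFree (g : List (List Int)) (c : Int × Int) : Prop :=
  0 ≤ c.1 ∧ c.1 < (g.length : Int) ∧ 0 ≤ c.2 ∧ c.2 < (g.length : Int) ∧ pvVal g c.1 c.2 ≠ -1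

def pvAdj (g : List (List Int)) (c d : Int × Int) : Prop :=
  pvFree g c ∧ pvFree g d ∧
    ((d.1 = c.1 + 1 ∧ d.2 = c.2) ∨ (d.1 = c.1 - 1 ∧ d.2 = c.2) ∨
     (d.1 = c.1 ∧ d.2 = c.2 + 1) ∨ (d.1 = c.1 ∧ d.2 = c.2 - 1))

def pvConn (g : List (List Int)) : Int × Int → Int × Int → Prop :=
  Relation.ReflTransGen (pvAdj g)

lemma pvAdj_symm (g : List (List Int)) : Symmetric (pvAdj g) := by
  rintro c d ⟨hc, hd, h⟩
  refine ⟨hd, hc, ?_⟩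
  rcases h with ⟨h1, h2⟩ | ⟨h1, h2⟩ | ⟨h1, h2⟩ | ⟨h1, h2⟩ <;> [skip; skip; skip; skip] <;> omega

lemma pvConn_symm (g : List (List Int)) : Symmetric (pvConn g) :=
  Relation.ReflTransGen.symmetric (pvAdj_symm g)

lemma pvConn_free_right (g : List (List Int)) (c d : Int × Int)
    (h : pvConn g c d) (hc : pvFree g c) : pvFree g d := by
  induction h with
  | refl => exact hc
  | tail _ hadj ih => exact hadj.2.1

lemma pvConn_closed (g : List (List Int)) (V : Int × Int → Prop)
    (hcl : ∀ c, V c → ∀ d, pvAdj g c d → V d) (c d : Int × Int)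
    (h : pvConn g c d) (hc : V c) : V d := by
  induction h with
  | refl => exact hc
  | tail _ hadj ih => exact hcl _ ih _ hadj

-- ---------- visited-matrix lemmas ----------

def pvShape (n : Nat) (v : List (List Bool)) : Prop :=
  v.length = n ∧ ∀ r ∈ v, r.length = n

lemma pvShape_replicate (n : Nat) : pvShape n (List.replicate n (List.replicate n false)) := by
  constructor
  · simp
  · intro r hr
    rw [List.eq_of_mem_replicate hr]; simp

lemma pvRowLen (n : Nat) (v : List (List Bool)) (a : Nat) (h1 : v.length = n)
    (h2 : ∀ r ∈ v, r.length = n) (ha : a < n) : (v.getD a []).length = n := by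
  have hlt : a < v.length := by omega
  rw [List.getD_eq_getElem _ _ hlt]; exact h2 _ (List.getElem_mem hlt)

lemma pvShape_mset (n : Nat) (v : List (List Bool)) (a b : Nat) (h : pvShape n v)
    (ha : a < n) : pvShape n (pvMset v a b) := by
  obtain ⟨h1, h2⟩ := h
  constructor
  · simp [pvMset, h1]
  · intro r hr
    rcases List.mem_or_eq_of_mem_set hr with hmem | heq
    · exact h2 r hmem
    · subst heq
      rw [List.length_set]
      exact pvRowLen n v a h1 h2 ha

lemma pvMget_mset (n : Nat) (v : List (List Bool)) (a b : Nat) (hsh : pvShape n v)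
    (ha : a < n) (hb : b < n) (a' b' : Nat) :
    pvMget (pvMset v a b) a' b' = ((a' = a ∧ b' = b : Prop) || pvMget v a' b') := by
  obtain ⟨h1, h2⟩ := hsh
  have hlt : a < v.length := by omega
  unfold pvMget
  by_cases haa : a' = a
  · subst haa
    have hrow : (pvMset v a' b).getD a' [] = (v.getD a' []).set b true := by
      unfold pvMset
      rw [List.getD_eq_getElem _ _ (by simpa using hlt), List.getElem_set_self]
    have hrlen : (v.getD a' []).length = n := pvRowLen n v a' h1 h2 ha
    rw [hrow]
    by_cases hbb : b' = b
    · subst hbb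
      rw [List.getD_eq_getElem _ _ (by rw [List.length_set]; omega), List.getElem_set_self]
      simp
    · rw [List.getD_eq_getElem?_getD, List.getElem?_set_ne (Ne.symm hbb),
        ← List.getD_eq_getElem?_getD]
      simp [hbb]
  · have hrow : (pvMset v a b).getD a' [] = v.getD a' [] := by
      unfold pvMset
      rw [List.getD_eq_getElem?_getD, List.getElem?_set_ne (fun h => haa h.symm),
        ← List.getD_eq_getElem?_getD]
    rw [hrow]
    simp [haa]

def pvTrueCount (v : List (List Bool)) : Nat :=
  (v.map (fun r => r.countP (fun x => x))).sum

lemma pvTrueCount_le_aux (n : Nat) :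
    ∀ v : List (List Bool), (∀ r ∈ v, r.length = n) → pvTrueCount v ≤ v.length * n := by
  intro v
  induction v with
  | nil => simp [pvTrueCount]
  | cons r t ih =>
    intro h
    have hr : r.countP (fun x => x) ≤ n :=
      le_of_le_of_eq List.countP_le_length (h r (by simp))
    have ht := ih (fun s hs => h s (by simp [hs]))
    simp only [pvTrueCount, List.map_cons, List.sum_cons, List.length_cons] at *
    rw [Nat.succ_mul]
    omega

lemma pvTrueCount_le (n : Nat) (v : List (List Bool)) (hsh : pvShape n v) :
    pvTrueCount v ≤ n * n := by
  obtain ⟨h1, h2⟩ := hsh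
  have := pvTrueCount_le_aux n v h2
  rwa [h1] at this

lemma pvCountP_set_true :
    ∀ (l : List Bool) (b : Nat), b < l.length → l[b]! = false →
      (l.set b true).countP (fun x => x) = l.countP (fun x => x) + 1 := by
  intro l
  induction l with
  | nil => intro b h; simp at h
  | cons x t ih =>
    intro b hb hx
    cases b with
    | zero => simp_all [List.countP_cons]
    | succ b =>
      simp only [List.length_cons] at hb
      have hx' : t[b]! = false := by simpa using hx
      simp only [List.set_cons_succ, List.countP_cons]
      rw [ih b (by omega) hx']
      omega

lemma pvSumNat_set :
    ∀ (l : List Nat) (i x : Nat), i < l.length → (l.set i x).sum + l[i]! = l.sum + x := by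
  intro l
  induction l with
  | nil => intro i x h; simp at h
  | cons y t ih =>
    intro i x hi
    cases i with
    | zero => simp [List.set_cons_zero]; omega
    | succ i =>
      simp only [List.length_cons] at hi
      have := ih i x (by omega)
      simp only [List.set_cons_succ, List.sum_cons]
      have hg : (y :: t)[i + 1]! = t[i]! := by simp
      rw [hg]
      omega

lemma pvTrueCount_mset (n : Nat) (v : List (List Bool)) (a b : Nat) (hsh : pvShape n v)
    (ha : a < n) (hb : b < n) (hfalse : pvMget v a b = false) :
    pvTrueCount (pvMset v a b) = pvTrueCount v + 1 := by
  obtain ⟨h1, h2⟩ := hsh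
  have hlt : a < v.length := by omega
  have hrlen : (v.getD a []).length = n := pvRowLen n v a h1 h2 ha
  have hget : (v.getD a [])[b]! = false := by
    unfold pvMget at hfalse
    rwa [List.getD_eq_getElem _ _ (by omega), ← getElem!_pos _ _ (by omega)] at hfalse
  have hrow := pvCountP_set_true (v.getD a []) b (by omega) hget
  unfold pvTrueCount pvMset
  rw [List.map_set]
  have hms := pvSumNat_set (v.map (fun r => r.countP (fun x => x))) a
      (((v.getD a []).set b true).countP (fun x => x)) (by simpa using hlt)
  have hmap : (v.map (fun r => r.countP (fun x => x)))[a]! = (v.getD a []).countP (fun x => x) := by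
    rw [List.getD_eq_getElem _ _ hlt, getElem!_pos _ _ (by simpa using hlt), List.getElem_map]
  rw [hmap] at hms
  omega

-- ---------- cell coordinate helpers ----------

lemma pvCellEq (g : List (List Int)) (c c' : Int × Int) (h : pvFree g c) (h' : pvFree g c') :
    (c.1.toNat = c'.1.toNat ∧ c.2.toNat = c'.2.toNat) ↔ c = c' := by
  obtain ⟨h1, h2, h3, h4, _⟩ := h
  obtain ⟨h1', h2', h3', h4', _⟩ := h'
  rw [Prod.ext_iff]
  omega

lemma pvFree_lt (g : List (List Int)) (c : Int × Int) (h : pvFree g c) :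
    c.1.toNat < g.length ∧ c.2.toNat < g.length := by
  obtain ⟨h1, h2, h3, h4, _⟩ := h
  omega

-- ---------- the inner neighbor-scan loop ----------

lemma pvScan_fold_spec (g : List (List Int)) (x y : Int) :
    ∀ (ds : List (Int × Int)) (qt : List (Int × Int)) (vis : List (List Bool)),
    pvShape g.length vis →
    ∃ new vis',
      ds.foldl (fun st d =>
        if 0 ≤ x + d.1 ∧ x + d.1 < (g.length : Int) ∧ 0 ≤ y + d.2 ∧ y + d.2 < (g.length : Int) ∧
            pvVal g (x + d.1) (y + d.2) ≠ -1 ∧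
            pvMget st.2 (x + d.1).toNat (y + d.2).toNat = false then
          (st.1 ++ [(x + d.1, y + d.2)], pvMset st.2 (x + d.1).toNat (y + d.2).toNat)
        else st) (qt, vis) = (qt ++ new, vis') ∧
      new.Nodup ∧
      (∀ c, c ∈ new ↔ ((∃ d ∈ ds, c = (x + d.1, y + d.2)) ∧ pvFree g c ∧
          pvMget vis c.1.toNat c.2.toNat = false)) ∧
      (∀ a b : Nat, pvMget vis' a b = (pvMget vis a b || decide (((a : Int), (b : Int)) ∈ new))) ∧
      pvShape g.length vis' ∧ pvTrueCount vis' = pvTrueCount vis + new.length := by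
  intro ds
  induction ds with
  | nil =>
    intro qt vis hsh
    exact ⟨[], vis, by simp, by simp, by simp, by simp, hsh, by simp⟩
  | cons d ds ih =>
    intro qt vis hsh
    by_cases hg : 0 ≤ x + d.1 ∧ x + d.1 < (g.length : Int) ∧ 0 ≤ y + d.2 ∧
        y + d.2 < (g.length : Int) ∧ pvVal g (x + d.1) (y + d.2) ≠ -1 ∧
        pvMget vis (x + d.1).toNat (y + d.2).toNat = false
    · have hfree0 : pvFree g (x + d.1, y + d.2) :=
        ⟨hg.1, hg.2.1, hg.2.2.1, hg.2.2.2.1, hg.2.2.2.2.1⟩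
      have hunm0 : pvMget vis (x + d.1).toNat (y + d.2).toNat = false := hg.2.2.2.2.2
      have hlt := pvFree_lt g _ hfree0
      simp only at hlt
      have hsh1 : pvShape g.length (pvMset vis (x + d.1).toNat (y + d.2).toNat) :=
        pvShape_mset _ _ _ _ hsh hlt.1
      obtain ⟨new1, vis', heq, hnd, hmem, hmg, hsh', htc⟩ :=
        ih (qt ++ [(x + d.1, y + d.2)]) (pvMset vis (x + d.1).toNat (y + d.2).toNat) hsh1
      have hmg1 := pvMget_mset g.length vis (x + d.1).toNat (y + d.2).toNat hsh hlt.1 hlt.2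
      have hiff : ∀ c : Int × Int,
          pvMget (pvMset vis (x + d.1).toNat (y + d.2).toNat) c.1.toNat c.2.toNat = false ↔
          (pvMget vis c.1.toNat c.2.toNat = false ∧
            ¬ (c.1.toNat = (x + d.1).toNat ∧ c.2.toNat = (y + d.2).toNat)) := by
        intro c
        rw [hmg1 c.1.toNat c.2.toNat]
        cases hv : pvMget vis c.1.toNat c.2.toNat <;> simp
      refine ⟨(x + d.1, y + d.2) :: new1, vis', ?_, ?_, ?_, ?_, hsh', ?_⟩
      · rw [List.foldl_cons, if_pos hg, heq]
        simp
      · rw [List.nodup_cons]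
        refine ⟨?_, hnd⟩
        intro hc0
        have h1 := ((hmem _).1 hc0).2.2
        rw [hmg1] at h1
        simp at h1
      · intro c
        simp only [List.mem_cons]
        constructor
        · rintro (rfl | hc)
          · exact ⟨⟨d, by simp, rfl⟩, hfree0, hunm0⟩
          · obtain ⟨⟨d0, hd0, rfl⟩, hf, hu⟩ := (hmem _).1 hc
            exact ⟨⟨d0, by simp [hd0], rfl⟩, hf, ((hiff _).1 hu).1⟩
        · rintro ⟨⟨d0, hd0, rfl⟩, hf, hu⟩
          rcases hd0 with rfl | hd0
          · left; rfl
          · by_cases hceq : ((x + d0.1, y + d0.2) : Int × Int) = (x + d.1, y + d.2)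
            · left; exact hceq
            · right
              apply (hmem _).2
              refine ⟨⟨d0, hd0, rfl⟩, hf, (hiff _).2 ⟨hu, ?_⟩⟩
              rw [pvCellEq g _ _ hf hfree0]
              exact hceq
      · intro a b
        rw [hmg a b, hmg1 a b]
        have hpe : (((a : Int), (b : Int)) = ((x + d.1, y + d.2) : Int × Int)) ↔
            (a = (x + d.1).toNat ∧ b = (y + d.2).toNat) := by
          rw [Prod.ext_iff]
          simp only
          omega
        rw [Bool.eq_iff_iff]
        simp only [List.mem_cons, hpe, Bool.or_eq_true, decide_eq_true_eq]
        tauto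
      · rw [htc, pvTrueCount_mset g.length vis _ _ hsh hlt.1 hlt.2 hunm0, List.length_cons]
        omega
    · obtain ⟨new1, vis', heq, hnd, hmem, hmg, hsh', htc⟩ := ih qt vis hsh
      refine ⟨new1, vis', ?_, hnd, ?_, hmg, hsh', htc⟩
      · rw [List.foldl_cons, if_neg hg, heq]
      · intro c
        rw [hmem c]
        constructor
        · rintro ⟨⟨d0, hd0, rfl⟩, hf, hu⟩
          exact ⟨⟨d0, by simp [hd0], rfl⟩, hf, hu⟩
        · rintro ⟨⟨d0, hd0, rfl⟩, hf, hu⟩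
          rcases List.mem_cons.1 hd0 with rfl | hd0
          · exact absurd ⟨hf.1, hf.2.1, hf.2.2.1, hf.2.2.2.1, hf.2.2.2.2, hu⟩ hg
          · exact ⟨⟨d0, hd0, rfl⟩, hf, hu⟩

-- ---------- pvScan specification against adjacency ----------

lemma pvCellRebuild (c : Int × Int) (h1 : 0 ≤ c.1) (h2 : 0 ≤ c.2) :
    (((c.1.toNat : Int), (c.2.toNat : Int)) : Int × Int) = c := by
  rw [Prod.ext_iff]
  constructor <;> simp [Int.toNat_of_nonneg, h1, h2]

lemma pvMgetIffP (vis : List (List Bool)) (P : Int × Int → Prop)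
    (hm : ∀ a b : Nat, pvMget vis a b = true ↔ P ((a : Int), (b : Int)))
    (c : Int × Int) (h1 : 0 ≤ c.1) (h2 : 0 ≤ c.2) :
    (pvMget vis c.1.toNat c.2.toNat = true ↔ P c) := by
  rw [hm c.1.toNat c.2.toNat, pvCellRebuild c h1 h2]

lemma pvScan_spec (g : List (List Int)) (x y : Int) (hfree : pvFree g (x, y))
    (qt : List (Int × Int)) (vis : List (List Bool)) (hsh : pvShape g.length vis) :
    ∃ new vis',
      pvScan g g.length x y (qt, vis) = (qt ++ new, vis') ∧
      new.Nodup ∧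
      (∀ c, c ∈ new ↔ (pvAdj g (x, y) c ∧ pvMget vis c.1.toNat c.2.toNat = false)) ∧
      (∀ a b : Nat, pvMget vis' a b = (pvMget vis a b || decide (((a : Int), (b : Int)) ∈ new))) ∧
      pvShape g.length vis' ∧ pvTrueCount vis' = pvTrueCount vis + new.length := by
  obtain ⟨new, vis', heq, hnd, hmem, hmg, hsh', htc⟩ :=
    pvScan_fold_spec g x y pvDirs qt vis hsh
  refine ⟨new, vis', heq, hnd, ?_, hmg, hsh', htc⟩
  intro c
  rw [hmem c]
  constructor
  · rintro ⟨⟨d, hd, rfl⟩, hf, hu⟩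
    refine ⟨⟨hfree, hf, ?_⟩, hu⟩
    simp only [pvDirs, List.mem_cons, List.not_mem_nil, or_false] at hd
    rcases hd with rfl | rfl | rfl | rfl <;> simp <;> omega
  · rintro ⟨⟨_, hf, hdir⟩, hu⟩
    refine ⟨?_, hf, hu⟩
    rcases hdir with ⟨h1, h2⟩ | ⟨h1, h2⟩ | ⟨h1, h2⟩ | ⟨h1, h2⟩
    · exact ⟨(1, 0), by simp [pvDirs], by rw [Prod.ext_iff]; constructor <;> simp <;> omega⟩
    · exact ⟨(-1, 0), by simp [pvDirs], by rw [Prod.ext_iff]; constructor <;> simp <;> omega⟩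
    · exact ⟨(0, 1), by simp [pvDirs], by rw [Prod.ext_iff]; constructor <;> simp <;> omega⟩
    · exact ⟨(0, -1), by simp [pvDirs], by rw [Prod.ext_iff]; constructor <;> simp <;> omega⟩

-- ---------- the BFS while-loop ----------

lemma pvBfsLoop_done (g : List (List Int)) (seed : Int × Int) (V : Int × Int → Prop)
    (hVfree : ∀ c, V c → pvFree g c)
    (hVcl : ∀ c, V c → ∀ d, pvAdj g c d → V d)
    (vis : List (List Bool)) (comp : List (Int × Int))
    (hmk : ∀ a b : Nat, pvMget vis a b = true ↔
        (V ((a : Int), (b : Int)) ∨ ((a : Int), (b : Int)) ∈ comp))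
    (hVdisj : ∀ c, V c → c ∉ comp)
    (hcompadj : ∀ c ∈ comp, ∀ d, pvAdj g c d → pvMget vis d.1.toNat d.2.toNat = true)
    (hcompconn : ∀ c ∈ comp, pvConn g seed c)
    (hseed : seed ∈ comp) :
    ∀ d, d ∈ comp ↔ pvConn g seed d := by
  intro d
  constructor
  · exact hcompconn d
  · intro hconn
    refine pvConn_closed g (fun c => c ∈ comp) ?_ seed d hconn hseed
    intro c hc e hadj
    have hefree : pvFree g e := hadj.2.1
    have hmark := hcompadj c hc e hadj
    rw [pvMgetIffP vis (fun c => V c ∨ c ∈ comp) hmk e hefree.1 hefree.2.2.1] at hmark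
    rcases hmark with hV | hin
    · exfalso
      have hVc : V c := hVcl e hV c (pvAdj_symm g hadj)
      exact hVdisj c hVc hc
    · exact hin

lemma pvBfsLoop_spec (g : List (List Int)) (seed : Int × Int) (V : Int × Int → Prop)
    (hVfree : ∀ c, V c → pvFree g c)
    (hVcl : ∀ c, V c → ∀ d, pvAdj g c d → V d) :
    ∀ (fuel : Nat) (q : List (Int × Int)) (vis : List (List Bool)) (comp : List (Int × Int))
      (cs : Int),
    pvShape g.length vis →
    (∀ a b : Nat, pvMget vis a b = true ↔
        (V ((a : Int), (b : Int)) ∨ ((a : Int), (b : Int)) ∈ comp ∨ ((a : Int), (b : Int)) ∈ q)) →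
    (∀ c ∈ q, pvFree g c) → (∀ c ∈ comp, pvFree g c) →
    q.Nodup → comp.Nodup → (∀ c ∈ comp, c ∉ q) →
    (∀ c, V c → c ∉ comp ∧ c ∉ q) →
    (∀ c ∈ comp, ∀ d, pvAdj g c d → pvMget vis d.1.toNat d.2.toNat = true) →
    (∀ c ∈ q, pvConn g seed c) → (∀ c ∈ comp, pvConn g seed c) →
    (seed ∈ comp ∨ seed ∈ q) →
    cs = (comp.map (fun c => pvVal g c.1 c.2)).sum →
    g.length * g.length - pvTrueCount vis + q.length ≤ fuel →
    ∃ CC vis',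
      pvBfsLoop g g.length fuel q vis comp cs =
        (CC, (CC.map (fun c => pvVal g c.1 c.2)).sum, vis') ∧
      CC.Nodup ∧ (∀ d, d ∈ CC ↔ pvConn g seed d) ∧ (∀ c ∈ CC, pvFree g c) ∧
      pvShape g.length vis' ∧
      (∀ a b : Nat, pvMget vis' a b = true ↔
          (V ((a : Int), (b : Int)) ∨ ((a : Int), (b : Int)) ∈ CC)) := by
  intro fuel
  induction fuel with
  | zero =>
    intro q vis comp cs hsh hmk hqfree hcompfree hqnd hcompnd hdisjcq hVdisj hcompadj hqconn
      hcompconn hseed hcs hfuel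
    cases q with
    | nil =>
      refine ⟨comp, vis, by simp [pvBfsLoop, hcs], hcompnd, ?_, hcompfree, hsh, ?_⟩
      · exact pvBfsLoop_done g seed V hVfree hVcl vis comp
          (by intro a b; rw [hmk a b]; simp)
          (fun c hV => (hVdisj c hV).1) hcompadj hcompconn (by tauto)
      · intro a b; rw [hmk a b]; simp
    | cons c qt =>
      exfalso
      simp only [List.length_cons] at hfuel
      omega
  | succ fuel ih =>
    intro q vis comp cs hsh hmk hqfree hcompfree hqnd hcompnd hdisjcq hVdisj hcompadj hqconn
      hcompconn hseed hcs hfuel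
    cases q with
    | nil =>
      refine ⟨comp, vis, by simp [pvBfsLoop, hcs], hcompnd, ?_, hcompfree, hsh, ?_⟩
      · exact pvBfsLoop_done g seed V hVfree hVcl vis comp
          (by intro a b; rw [hmk a b]; simp)
          (fun c hV => (hVdisj c hV).1) hcompadj hcompconn (by tauto)
      · intro a b; rw [hmk a b]; simp
    | cons c qt =>
      obtain ⟨x, y⟩ := c
      have hfree_xy : pvFree g (x, y) := hqfree _ (by simp)
      obtain ⟨new, vis1, hscan, hnnd, hnmem, hnmg, hsh1, htc1⟩ :=
        pvScan_spec g x y hfree_xy qt vis hsh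
      have hstep : pvBfsLoop g g.length (fuel + 1) ((x, y) :: qt) vis comp cs =
          pvBfsLoop g g.length fuel (qt ++ new) vis1 (comp ++ [(x, y)])
            (cs + pvVal g x y) := by
        show pvBfsLoop g g.length fuel (pvScan g g.length x y (qt, vis)).1
            (pvScan g g.length x y (qt, vis)).2 (comp ++ [(x, y)]) (cs + pvVal g x y) = _
        rw [hscan]
      have hmkP := pvMgetIffP vis
        (fun c => V c ∨ c ∈ comp ∨ c ∈ (x, y) :: qt) hmk
      have hmarked_of_q : ∀ c ∈ (x, y) :: qt, pvMget vis c.1.toNat c.2.toNat = true := by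
        intro c hc
        have hf := hqfree c hc
        rw [hmkP c hf.1 hf.2.2.1]
        tauto
      have hmarked_of_comp : ∀ c ∈ comp, pvMget vis c.1.toNat c.2.toNat = true := by
        intro c hc
        have hf := hcompfree c hc
        rw [hmkP c hf.1 hf.2.2.1]
        tauto
      have hnew_unmk : ∀ c ∈ new, pvMget vis c.1.toNat c.2.toNat = false :=
        fun c hc => ((hnmem c).1 hc).2
      have hnew_free : ∀ c ∈ new, pvFree g c :=
        fun c hc => ((hnmem c).1 hc).1.2.1
      have hnew_conn : ∀ c ∈ new, pvConn g seed c := by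
        intro c hc
        exact Relation.ReflTransGen.tail (hqconn _ (by simp)) ((hnmem c).1 hc).1
      have hnew_not_marked : ∀ c ∈ new, c ∉ comp ∧ c ∉ (x, y) :: qt ∧ ¬ V c := by
        intro c hc
        have hu := hnew_unmk c hc
        have hf := hnew_free c hc
        have hcon : ¬ (V c ∨ c ∈ comp ∨ c ∈ (x, y) :: qt) := by
          intro hor
          have hmt := (hmkP c hf.1 hf.2.2.1).2 hor
          rw [hu] at hmt
          simp at hmt
        tauto
      have hmk1 : ∀ a b : Nat, pvMget vis1 a b = true ↔
          (V ((a : Int), (b : Int)) ∨ ((a : Int), (b : Int)) ∈ comp ++ [(x, y)] ∨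
            ((a : Int), (b : Int)) ∈ qt ++ new) := by
        intro a b
        rw [hnmg a b]
        simp only [Bool.or_eq_true, decide_eq_true_eq, List.mem_append, List.mem_cons,
          List.mem_singleton]
        rw [hmk a b]
        simp only [List.mem_cons]
        tauto
      have hmk1P := pvMgetIffP vis1
        (fun c => V c ∨ c ∈ comp ++ [(x, y)] ∨ c ∈ qt ++ new) hmk1
      obtain ⟨CC, vis', hres, h1, h2, h3, h4, h5⟩ := ih (qt ++ new) vis1 (comp ++ [(x, y)])
        (cs + pvVal g x y) hsh1 hmk1
        (by intro c hc
            rcases List.mem_append.1 hc with h | h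
            · exact hqfree c (by simp [h])
            · exact hnew_free c h)
        (by intro c hc
            rcases List.mem_append.1 hc with h | h
            · exact hcompfree c h
            · rw [List.mem_singleton] at h; subst h; exact hfree_xy)
        (by rw [List.nodup_append]
            refine ⟨(List.nodup_cons.1 hqnd).2, hnnd, ?_⟩
            intro c hc c' hc' hne
            subst hne
            exact (hnew_not_marked c hc').2.1 (by simp [hc]))
        (by rw [List.nodup_append]
            refine ⟨hcompnd, List.nodup_singleton _, ?_⟩
            intro c hc c' hc' hne
            rw [List.mem_singleton] at hc'
            subst hc' hne
            exact hdisjcq _ hc (by simp))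
        (by intro c hc hq
            rcases List.mem_append.1 hq with h | h
            · rcases List.mem_append.1 hc with h' | h'
              · exact hdisjcq c h' (by simp [h])
              · rw [List.mem_singleton] at h'; subst h'
                exact (List.nodup_cons.1 hqnd).1 h
            · rcases List.mem_append.1 hc with h' | h'
              · exact (hnew_not_marked c h).1 h'
              · rw [List.mem_singleton] at h'; subst h'
                exact (hnew_not_marked _ h).2.1 (by simp))
        (by intro c hV
            constructor
            · intro hc
              rcases List.mem_append.1 hc with h | h
              · exact (hVdisj c hV).1 h
              · rw [List.mem_singleton] at h; subst h
                exact (hVdisj _ hV).2 (by simp)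
            · intro hc
              rcases List.mem_append.1 hc with h | h
              · exact (hVdisj c hV).2 (by simp [h])
              · exact (hnew_not_marked c h).2.2 hV)
        (by intro c hc d hadj
            have hdfree : pvFree g d := hadj.2.1
            rcases List.mem_append.1 hc with h | h
            · have := hcompadj c h d hadj
              rw [hmkP d hdfree.1 hdfree.2.2.1] at this
              rw [hmk1P d hdfree.1 hdfree.2.2.1]
              simp only [List.mem_append, List.mem_cons, List.mem_singleton] at this ⊢
              tauto
            · rw [List.mem_singleton] at h; subst h
              rw [hmk1P d hdfree.1 hdfree.2.2.1]
              by_cases hu : pvMget vis d.1.toNat d.2.toNat = false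
              · have : d ∈ new := (hnmem d).2 ⟨hadj, hu⟩
                right; right; exact List.mem_append.2 (Or.inr this)
              · have hmt : pvMget vis d.1.toNat d.2.toNat = true := by
                  cases h' : pvMget vis d.1.toNat d.2.toNat
                  · exact absurd h' hu
                  · rfl
                rw [hmkP d hdfree.1 hdfree.2.2.1] at hmt
                simp only [List.mem_append, List.mem_cons, List.mem_singleton] at hmt ⊢
                tauto)
        (by intro c hc
            rcases List.mem_append.1 hc with h | h
            · exact hqconn c (by simp [h])
            · exact hnew_conn c h)
        (by intro c hc
            rcases List.mem_append.1 hc with h | h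
            · exact hcompconn c h
            · rw [List.mem_singleton] at h; subst h
              exact hqconn _ (by simp))
        (by rcases hseed with h | h
            · left; exact List.mem_append.2 (Or.inl h)
            · rcases List.mem_cons.1 h with h' | h'
              · subst h'; left; exact List.mem_append.2 (Or.inr (by simp))
              · right; exact List.mem_append.2 (Or.inl h'))
        (by rw [hcs]; simp)
        (by have htcle := pvTrueCount_le g.length vis1 hsh1
            rw [htc1] at htcle ⊢
            simp only [List.length_append, List.length_cons] at hfuel ⊢
            omega)
      exact ⟨CC, vis', by rw [hstep]; exact hres, h1, h2, h3, h4, h5⟩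

-- ---------- position list and nested-loop flattening ----------

def pvPos (n : Nat) : List (Nat × Nat) :=
  (List.range n).flatMap (fun i => (List.range n).map fun j => (i, j))

lemma pvMem_pvPos (n : Nat) (p : Nat × Nat) : p ∈ pvPos n ↔ p.1 < n ∧ p.2 < n := by
  obtain ⟨i, j⟩ := p
  simp [pvPos, List.mem_flatMap]

lemma pvNodup_pvPos (n : Nat) : (pvPos n).Nodup := by
  unfold pvPos
  rw [List.nodup_flatMap]
  constructor
  · intro i _
    exact (List.nodup_range).map (fun a b h => (Prod.ext_iff.1 h).2)
  · refine List.Pairwise.imp ?_ (List.pairwise_lt_range)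
    intro a b hab
    intro x hx hy
    simp only [List.mem_map] at hx hy
    obtain ⟨j1, _, rfl⟩ := hx
    obtain ⟨j2, _, h⟩ := hy
    have : b = a := by
      have h2 := (Prod.ext_iff.1 h).1
      simpa using h2
    omega

lemma pvNested_foldl {σ : Type} (n : Nat) (f : σ → Nat → Nat → σ) (init : σ) :
    (List.range n).foldl (fun s i => (List.range n).foldl (fun s j => f s i j) s) init
    = (pvPos n).foldl (fun s p => f s p.1 p.2) init := by
  rw [pvPos, List.foldl_flatMap]
  apply PySem.List.foldl_congr_mem
  intro acc i _
  rw [List.foldl_map]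

-- ---------- one whole BFS call ----------

lemma pvBfs_spec (g : List (List Int)) (i j : Nat) (vis : List (List Bool))
    (hsh : pvShape g.length vis)
    (hfree : pvFree g ((i : Int), (j : Int))) (hunm : pvMget vis i j = false)
    (hmark_free : ∀ a b : Nat, pvMget vis a b = true → pvFree g ((a : Int), (b : Int)))
    (hmark_closed : ∀ a b : Nat, pvMget vis a b = true →
      ∀ d, pvAdj g ((a : Int), (b : Int)) d → pvMget vis d.1.toNat d.2.toNat = true) :
    ∃ C vis',
      pvBfs g g.length i j vis = (C, (C.map (fun c => pvVal g c.1 c.2)).sum, vis') ∧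
      C.Nodup ∧ (∀ d, d ∈ C ↔ pvConn g ((i : Int), (j : Int)) d) ∧ (∀ c ∈ C, pvFree g c) ∧
      pvShape g.length vis' ∧
      (∀ a b : Nat, pvMget vis' a b = true ↔
        (pvMget vis a b = true ∨ ((a : Int), (b : Int)) ∈ C)) := by
  have hi : i < g.length := by
    have := hfree.2.1
    simp only at this
    omega
  have hj : j < g.length := by
    have := hfree.2.2.2.1
    simp only at this
    omega
  have hsh1 := pvShape_mset g.length vis i j hsh hi
  have htc1 := pvTrueCount_mset g.length vis i j hsh hi hj hunm
  have hmg1 := pvMget_mset g.length vis i j hsh hi hj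
  obtain ⟨CC, vis', hres, h1, h2, h3, h4, h5⟩ :=
    pvBfsLoop_spec g ((i : Int), (j : Int))
      (fun c => pvMget vis c.1.toNat c.2.toNat = true ∧ 0 ≤ c.1 ∧ 0 ≤ c.2)
      (by intro c ⟨hm, hc1, hc2⟩
          have := hmark_free c.1.toNat c.2.toNat hm
          rwa [pvCellRebuild c hc1 hc2] at this)
      (by intro c ⟨hm, hc1, hc2⟩ d hadj
          have hdf : pvFree g d := hadj.2.1
          refine ⟨?_, hdf.1, hdf.2.2.1⟩
          apply hmark_closed c.1.toNat c.2.toNat hm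
          rwa [pvCellRebuild c hc1 hc2])
      (g.length * g.length) [((i : Int), (j : Int))] (pvMset vis i j) [] 0 hsh1
      (by intro a b
          rw [hmg1 a b]
          simp only [Bool.or_eq_true, decide_eq_true_eq, List.not_mem_nil, false_or,
            List.mem_singleton, Int.toNat_natCast, Prod.ext_iff, Int.natCast_inj]
          constructor
          · rintro (⟨rfl, rfl⟩ | hm)
            · right; exact ⟨rfl, rfl⟩
            · left; exact ⟨by simpa using hm, by positivity, by positivity⟩
          · rintro (⟨hm, _, _⟩ | ⟨rfl, rfl⟩)
            · right; simpa using hm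
            · left; exact ⟨rfl, rfl⟩)
      (by intro c hc; rw [List.mem_singleton] at hc; subst hc; exact hfree)
      (by simp) (List.nodup_singleton _) List.nodup_nil (by simp)
      (by rintro c ⟨hm, hc1, hc2⟩
          refine ⟨by simp, ?_⟩
          rw [List.mem_singleton]
          rintro rfl
          simp only [Int.toNat_natCast] at hm
          rw [hunm] at hm
          exact Bool.false_ne_true hm)
      (by simp)
      (by intro c hc; rw [List.mem_singleton] at hc; subst hc; exact Relation.ReflTransGen.refl)
      (by simp) (Or.inr (by simp)) (by simp)
      (by rw [htc1]
          have hnn : 1 * 1 ≤ g.length * g.length := Nat.mul_le_mul (by omega) (by omega)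
          simp only [List.length_singleton]
          omega)
  refine ⟨CC, vis', hres, h1, h2, h3, h4, ?_⟩
  intro a b
  rw [h5 a b]
  simp only [Int.toNat_natCast]
  constructor
  · rintro (⟨hm, _, _⟩ | hc)
    · left; exact hm
    · right; exact hc
  · rintro (hm | hc)
    · left; exact ⟨hm, by positivity, by positivity⟩
    · right; exact hc


-- ---------- outer loop over all positions ----------

lemma pvVal_natCast (g : List (List Int)) (i j : Nat) :
    pvVal g ((i : Int)) ((j : Int)) = pvValN g i j := by
  simp [pvVal]

structure pvOInv (g : List (List Int)) (st : List (List Bool) × List (List (Int × Int) × Int)) :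
    Prop where
  shape : pvShape g.length st.1
  mfree : ∀ a b : Nat, pvMget st.1 a b = true → pvFree g ((a : Int), (b : Int))
  mcl : ∀ a b : Nat, pvMget st.1 a b = true →
    ∀ d, pvAdj g ((a : Int), (b : Int)) d → pvMget st.1 d.1.toNat d.2.toNat = true
  miff : ∀ a b : Nat, pvMget st.1 a b = true ↔ ∃ pc ∈ st.2, ((a : Int), (b : Int)) ∈ pc.1
  comps : ∀ pc ∈ st.2, pc.1.Nodup ∧
    (∃ s0, pvFree g s0 ∧ ∀ d, (d ∈ pc.1 ↔ pvConn g s0 d)) ∧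
    pc.2 = (pc.1.map (fun c => pvVal g c.1 c.2)).sum
  disj : st.2.Pairwise (fun p q => ∀ d, d ∈ p.1 → d ∉ q.1)

lemma pvMarked_closed_cells (g : List (List Int))
    (st : List (List Bool) × List (List (Int × Int) × Int)) (hinv : pvOInv g st) :
    ∀ c, (pvMget st.1 c.1.toNat c.2.toNat = true ∧ 0 ≤ c.1 ∧ 0 ≤ c.2) →
      ∀ d, pvAdj g c d → (pvMget st.1 d.1.toNat d.2.toNat = true ∧ 0 ≤ d.1 ∧ 0 ≤ d.2) := by
  rintro c ⟨hm, h1, h2⟩ d hadj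
  have hdf : pvFree g d := hadj.2.1
  refine ⟨?_, hdf.1, hdf.2.2.1⟩
  apply hinv.mcl c.1.toNat c.2.toNat hm
  rwa [pvCellRebuild c h1 h2]

lemma pvOuter_fold_spec (g : List (List Int)) :
    ∀ (rem : List (Nat × Nat)) (st : List (List Bool) × List (List (Int × Int) × Int)),
    (∀ p ∈ rem, p.1 < g.length ∧ p.2 < g.length) → pvOInv g st →
    pvOInv g (rem.foldl (fun st p =>
        if pvValN g p.1 p.2 ≠ -1 ∧ pvMget st.1 p.1 p.2 = false then
          ((pvBfs g g.length p.1 p.2 st.1).2.2,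
            st.2 ++ [((pvBfs g g.length p.1 p.2 st.1).1, (pvBfs g g.length p.1 p.2 st.1).2.1)])
        else st) st) ∧
    (∀ a b : Nat, pvMget st.1 a b = true →
      pvMget (rem.foldl (fun st p =>
        if pvValN g p.1 p.2 ≠ -1 ∧ pvMget st.1 p.1 p.2 = false then
          ((pvBfs g g.length p.1 p.2 st.1).2.2,
            st.2 ++ [((pvBfs g g.length p.1 p.2 st.1).1, (pvBfs g g.length p.1 p.2 st.1).2.1)])
        else st) st).1 a b = true) ∧
    (∀ p ∈ rem, pvFree g ((p.1 : Int), (p.2 : Int)) →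
      pvMget (rem.foldl (fun st p =>
        if pvValN g p.1 p.2 ≠ -1 ∧ pvMget st.1 p.1 p.2 = false then
          ((pvBfs g g.length p.1 p.2 st.1).2.2,
            st.2 ++ [((pvBfs g g.length p.1 p.2 st.1).1, (pvBfs g g.length p.1 p.2 st.1).2.1)])
        else st) st).1 p.1 p.2 = true) := by
  intro rem
  induction rem with
  | nil =>
    intro st _ hinv
    exact ⟨hinv, fun a b h => h, by simp⟩
  | cons p rest ih =>
    intro st hrem hinv
    obtain ⟨i, j⟩ := p
    have hij := hrem (i, j) (by simp)
    simp only at hij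
    rw [List.foldl_cons]
    by_cases hg : pvValN g i j ≠ -1 ∧ pvMget st.1 i j = false
    · rw [if_pos hg]
      have hfree : pvFree g ((i : Int), (j : Int)) := by
        refine ⟨by positivity, by simpa using hij.1, by positivity, by simpa using hij.2, ?_⟩
        rw [pvVal_natCast]
        exact hg.1
      obtain ⟨C, vis', hbfs, hCnd, hCmem, hCfree, hsh', hmk'⟩ :=
        pvBfs_spec g i j st.1 hinv.shape hfree hg.2 hinv.mfree hinv.mcl
      have hCdisj : ∀ pc ∈ st.2, ∀ d, d ∈ pc.1 → d ∉ C := by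
        intro pc hpc d hd hdC
        have hconn : pvConn g ((i : Int), (j : Int)) d := (hCmem d).1 hdC
        have hdm : pvMget st.1 d.1.toNat d.2.toNat = true ∧ 0 ≤ d.1 ∧ 0 ≤ d.2 := by
          have hdf : pvFree g d := by
            rcases hinv.comps pc hpc with ⟨_, ⟨s0, hs0f, hiffm⟩, _⟩
            exact pvConn_free_right g s0 d ((hiffm d).1 hd) hs0f
          refine ⟨?_, hdf.1, hdf.2.2.1⟩
          have : ∃ pc ∈ st.2, ((d.1.toNat : Int), (d.2.toNat : Int)) ∈ pc.1 := by
            refine ⟨pc, hpc, ?_⟩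
            rwa [pvCellRebuild d hdf.1 hdf.2.2.1]
          exact (hinv.miff d.1.toNat d.2.toNat).2 this
        have hseedm := pvConn_closed g _ (pvMarked_closed_cells g st hinv)
          d ((i : Int), (j : Int)) (pvConn_symm g hconn) hdm
        simp only [Int.toNat_natCast] at hseedm
        rw [hg.2] at hseedm
        exact Bool.false_ne_true hseedm.1
      have hinv' : pvOInv g (vis', st.2 ++ [(C, (C.map (fun c => pvVal g c.1 c.2)).sum)]) := by
        refine ⟨hsh', ?_, ?_, ?_, ?_, ?_⟩
        · intro a b hm
          rcases (hmk' a b).1 hm with h | h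
          · exact hinv.mfree a b h
          · exact hCfree _ h
        · intro a b hm d hadj
          have hdf : pvFree g d := hadj.2.1
          rcases (hmk' a b).1 hm with h | h
          · have := hinv.mcl a b h d hadj
            rw [hmk' d.1.toNat d.2.toNat]
            exact Or.inl this
          · have hconn : pvConn g ((i : Int), (j : Int)) ((a : Int), (b : Int)) :=
              (hCmem _).1 h
            have hconnd : pvConn g ((i : Int), (j : Int)) d :=
              Relation.ReflTransGen.tail hconn hadj
            rw [hmk' d.1.toNat d.2.toNat, pvCellRebuild d hdf.1 hdf.2.2.1]
            exact Or.inr ((hCmem d).2 hconnd)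
        · intro a b
          rw [hmk' a b]
          simp only [List.mem_append, List.mem_singleton]
          constructor
          · rintro (h | h)
            · obtain ⟨pc, hpc, hmem⟩ := (hinv.miff a b).1 h
              exact ⟨pc, Or.inl hpc, hmem⟩
            · exact ⟨(C, (C.map (fun c => pvVal g c.1 c.2)).sum), Or.inr rfl, h⟩
          · rintro ⟨pc, hpc | hpc, hmem⟩
            · exact Or.inl ((hinv.miff a b).2 ⟨pc, hpc, hmem⟩)
            · subst hpc
              exact Or.inr hmem
        · intro pc hpc
          rcases List.mem_append.1 hpc with h | h
          · exact hinv.comps pc h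
          · rw [List.mem_singleton] at h
            subst h
            exact ⟨hCnd, ⟨((i : Int), (j : Int)), hfree, hCmem⟩, rfl⟩
        · rw [List.pairwise_append]
          refine ⟨hinv.disj, by simp, ?_⟩
          intro pc hpc pc' hpc'
          rw [List.mem_singleton] at hpc'
          subst hpc'
          exact hCdisj pc hpc
      have hmono' : ∀ a b : Nat, pvMget st.1 a b = true → pvMget vis' a b = true := by
        intro a b hm
        rw [hmk' a b]
        exact Or.inl hm
      obtain ⟨hinvr, hmonor, hcovr⟩ := ih
        (vis', st.2 ++ [(C, (C.map (fun c => pvVal g c.1 c.2)).sum)])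
        (fun p hp => hrem p (by simp [hp])) hinv'
      rw [hbfs]
      refine ⟨hinvr, ?_, ?_⟩
      · intro a b hm
        exact hmonor a b (hmono' a b hm)
      · intro p hp hpfree
        rcases List.mem_cons.1 hp with rfl | hp
        · apply hmonor
          show pvMget vis' i j = true
          rw [hmk' i j]
          right
          exact (hCmem _).2 Relation.ReflTransGen.refl
        · exact hcovr p hp hpfree
    · rw [if_neg hg]
      obtain ⟨hinvr, hmonor, hcovr⟩ := ih st (fun p hp => hrem p (by simp [hp])) hinv
      refine ⟨hinvr, hmonor, ?_⟩
      intro p hp hpfree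
      rcases List.mem_cons.1 hp with rfl | hp
      · apply hmonor
        rcases not_and_or.1 hg with h | h
        · exfalso
          apply h
          show pvValN g i j ≠ -1
          rw [← pvVal_natCast]
          exact hpfree.2.2.2.2
        · cases h' : pvMget st.1 i j
          · exact absurd h' h
          · rfl
      · exact hcovr p hp hpfree


-- ---------- union-find: find ----------

lemma pvFind_of_root (p : List Nat) (x : Nat) (hx : p.getD x x = x) :
    ∀ fuel, pvFind p fuel x = x := by
  intro fuel
  cases fuel with
  | zero => rfl
  | succ f =>
    show (if p.getD x x = x then x else pvFind p f (p.getD x x)) = x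
    rw [if_pos hx]

lemma pvFindR_of_root (p : List Nat) (x : Nat) (hx : p.getD x x = x) : pvFindR p x = x :=
  pvFind_of_root p x hx x

lemma pvFind_fuel_ge (p : List Nat) (hm : ∀ x, p.getD x x ≤ x) :
    ∀ x fuel, x ≤ fuel → pvFind p fuel x = pvFindR p x := by
  intro x
  induction x using Nat.strong_induction_on with
  | _ x ih =>
    intro fuel hf
    by_cases hr : p.getD x x = x
    · rw [pvFind_of_root p x hr, pvFindR_of_root p x hr]
    · have hlt : p.getD x x < x := lt_of_le_of_ne (hm x) hr
      obtain ⟨x', rfl⟩ : ∃ x', x = x' + 1 := ⟨x - 1, by omega⟩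
      obtain ⟨f, rfl⟩ : ∃ f, fuel = f + 1 := ⟨fuel - 1, by omega⟩
      have h1 : pvFind p (f + 1) (x' + 1) = pvFind p f (p.getD (x' + 1) (x' + 1)) := by
        show (if p.getD (x' + 1) (x' + 1) = x' + 1 then x' + 1
            else pvFind p f (p.getD (x' + 1) (x' + 1))) = _
        rw [if_neg hr]
      have h2 : pvFindR p (x' + 1) = pvFind p x' (p.getD (x' + 1) (x' + 1)) := by
        show (if p.getD (x' + 1) (x' + 1) = x' + 1 then x' + 1
            else pvFind p x' (p.getD (x' + 1) (x' + 1))) = _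
        rw [if_neg hr]
      rw [h1, h2, ih _ hlt f (by omega), ih _ hlt x' (by omega)]

lemma pvFindR_step (p : List Nat) (hm : ∀ x, p.getD x x ≤ x) (x : Nat)
    (hx : p.getD x x ≠ x) : pvFindR p x = pvFindR p (p.getD x x) := by
  have hlt : p.getD x x < x := lt_of_le_of_ne (hm x) hx
  obtain ⟨x', rfl⟩ : ∃ x', x = x' + 1 := ⟨x - 1, by omega⟩
  have h2 : pvFindR p (x' + 1) = pvFind p x' (p.getD (x' + 1) (x' + 1)) := by
    show (if p.getD (x' + 1) (x' + 1) = x' + 1 then x' + 1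
        else pvFind p x' (p.getD (x' + 1) (x' + 1))) = _
    rw [if_neg hx]
  rw [h2, pvFind_fuel_ge p hm (p.getD (x' + 1) (x' + 1)) x' (by omega)]

lemma pvFindR_is_root (p : List Nat) (hm : ∀ x, p.getD x x ≤ x) (x : Nat) :
    p.getD (pvFindR p x) (pvFindR p x) = pvFindR p x := by
  induction x using Nat.strong_induction_on with
  | _ x ih =>
    by_cases hr : p.getD x x = x
    · rw [pvFindR_of_root p x hr]
      exact hr
    · rw [pvFindR_step p hm x hr]
      exact ih (p.getD x x) (lt_of_le_of_ne (hm x) hr)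

lemma pvSetGetD (l : List Nat) (i v x : Nat) (hi : i < l.length) :
    (l.set i v).getD x x = if x = i then v else l.getD x x := by
  by_cases hx : x = i
  · subst hx
    simp [List.getD_eq_getElem?_getD, List.getElem?_set_self hi]
  · simp [List.getD_eq_getElem?_getD, List.getElem?_set_ne (fun h => hx h.symm), hx]

lemma pvMono_update (p : List Nat) (r1 r2 : Nat) (hm : ∀ x, p.getD x x ≤ x)
    (h12 : r1 < r2) (hlen : r2 < p.length) : ∀ x, (p.set r2 r1).getD x x ≤ x := by
  intro x
  rw [pvSetGetD p r2 r1 x hlen]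
  split_ifs with h
  · omega
  · exact hm x

lemma pvFindR_below (p : List Nat) (r1 r2 : Nat) (hm : ∀ x, p.getD x x ≤ x)
    (h12 : r1 < r2) (hlen : r2 < p.length) :
    ∀ x, x < r2 → pvFindR (p.set r2 r1) x = pvFindR p x := by
  intro x
  induction x using Nat.strong_induction_on with
  | _ x ih =>
    intro hx
    have hget : (p.set r2 r1).getD x x = p.getD x x := by
      rw [pvSetGetD p r2 r1 x hlen]
      simp [Nat.ne_of_lt hx]
    by_cases hr : p.getD x x = x
    · rw [pvFindR_of_root _ x (by rw [hget]; exact hr), pvFindR_of_root p x hr]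
    · have hlt : p.getD x x < x := lt_of_le_of_ne (hm x) hr
      rw [pvFindR_step _ (pvMono_update p r1 r2 hm h12 hlen) x (by rw [hget]; exact hr),
        pvFindR_step p hm x hr, hget]
      exact ih (p.getD x x) hlt (by omega)

lemma pvFindR_update (p : List Nat) (r1 r2 : Nat) (hm : ∀ x, p.getD x x ≤ x)
    (hr1 : p.getD r1 r1 = r1) (hr2 : p.getD r2 r2 = r2)
    (h12 : r1 < r2) (hlen : r2 < p.length) :
    ∀ x, pvFindR (p.set r2 r1) x = if pvFindR p x = r2 then r1 else pvFindR p x := by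
  intro x
  induction x using Nat.strong_induction_on with
  | _ x ih =>
    by_cases hx2 : x = r2
    · rw [hx2]
      have hget : (p.set r2 r1).getD r2 r2 = r1 := by
        rw [pvSetGetD p r2 r1 r2 hlen]
        simp
      rw [pvFindR_step _ (pvMono_update p r1 r2 hm h12 hlen) r2 (by rw [hget]; omega), hget,
        pvFindR_below p r1 r2 hm h12 hlen r1 h12, pvFindR_of_root p r1 hr1,
        pvFindR_of_root p r2 hr2]
      simp
    · have hget : (p.set r2 r1).getD x x = p.getD x x := by
        rw [pvSetGetD p r2 r1 x hlen]
        simp [hx2]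
      by_cases hr : p.getD x x = x
      · rw [pvFindR_of_root _ x (by rw [hget]; exact hr), pvFindR_of_root p x hr]
        simp [hx2]
      · have hlt : p.getD x x < x := lt_of_le_of_ne (hm x) hr
        rw [pvFindR_step _ (pvMono_update p r1 r2 hm h12 hlen) x (by rw [hget]; exact hr), hget,
          pvFindR_step p hm x hr]
        exact ih (p.getD x x) hlt


-- ---------- equivalence-closure lemmas ----------

lemma pvEqvGen_mono {α : Type} {r s : α → α → Prop}
    (h : ∀ x y, r x y → Relation.EqvGen s x y) :
    ∀ x y, Relation.EqvGen r x y → Relation.EqvGen s x y := by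
  intro x y hxy
  induction hxy with
  | rel a b hab => exact h a b hab
  | refl a => exact Relation.EqvGen.refl a
  | symm a b _ ih => exact Relation.EqvGen.symm a b ih
  | trans a b c _ _ ih1 ih2 => exact Relation.EqvGen.trans a b c ih1 ih2

lemma pvEqvGen_empty {α : Type} {r : α → α → Prop} (hr : ∀ x y, ¬ r x y) :
    ∀ x y, Relation.EqvGen r x y → x = y := by
  intro x y hxy
  induction hxy with
  | rel a b hab => exact absurd hab (hr a b)
  | refl a => rfl
  | symm a b _ ih => exact ih.symm
  | trans a b c _ _ ih1 ih2 => exact ih1.trans ih2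

lemma pvEqvGen_join {α : Type} (r : α → α → Prop) (a b : α) :
    ∀ x y, Relation.EqvGen (fun u v => r u v ∨ (u = a ∧ v = b) ∨ (u = b ∧ v = a)) x y ↔
      (Relation.EqvGen r x y ∨
        (Relation.EqvGen r x a ∧ Relation.EqvGen r b y) ∨
        (Relation.EqvGen r x b ∧ Relation.EqvGen r a y)) := by
  have T : ∀ {u v w : α}, Relation.EqvGen r u v → Relation.EqvGen r v w →
      Relation.EqvGen r u w := fun h1 h2 => Relation.EqvGen.trans _ _ _ h1 h2
  have S : ∀ {u v : α}, Relation.EqvGen r u v → Relation.EqvGen r v u :=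
    fun h => Relation.EqvGen.symm _ _ h
  intro x y
  constructor
  · intro hxy
    induction hxy with
    | rel u v huv =>
      rcases huv with h | ⟨rfl, rfl⟩ | ⟨rfl, rfl⟩
      · exact Or.inl (Relation.EqvGen.rel _ _ h)
      · exact Or.inr (Or.inl ⟨Relation.EqvGen.refl _, Relation.EqvGen.refl _⟩)
      · exact Or.inr (Or.inr ⟨Relation.EqvGen.refl _, Relation.EqvGen.refl _⟩)
    | refl u => exact Or.inl (Relation.EqvGen.refl u)
    | symm u v _ ih =>
      rcases ih with h | ⟨h1, h2⟩ | ⟨h1, h2⟩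
      · exact Or.inl (S h)
      · exact Or.inr (Or.inr ⟨S h2, S h1⟩)
      · exact Or.inr (Or.inl ⟨S h2, S h1⟩)
    | trans u v w _ _ ih1 ih2 =>
      rcases ih1 with h | ⟨h1, h2⟩ | ⟨h1, h2⟩ <;> rcases ih2 with h' | ⟨h1', h2'⟩ | ⟨h1', h2'⟩
      · exact Or.inl (T h h')
      · exact Or.inr (Or.inl ⟨T h h1', h2'⟩)
      · exact Or.inr (Or.inr ⟨T h h1', h2'⟩)
      · exact Or.inr (Or.inl ⟨h1, T h2 h'⟩)
      · exact Or.inl (T h1 (T (S (T h2 h1')) h2'))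
      · exact Or.inl (T h1 h2')
      · exact Or.inr (Or.inr ⟨h1, T h2 h'⟩)
      · exact Or.inl (T h1 h2')
      · exact Or.inl (T h1 (T (S (T h2 h1')) h2'))
  · intro hxy
    have hab : Relation.EqvGen
        (fun u v => r u v ∨ (u = a ∧ v = b) ∨ (u = b ∧ v = a)) a b :=
      Relation.EqvGen.rel _ _ (Or.inr (Or.inl ⟨rfl, rfl⟩))
    have hmono := pvEqvGen_mono
      (r := r) (s := fun u v => r u v ∨ (u = a ∧ v = b) ∨ (u = b ∧ v = a))
      (fun u v huv => Relation.EqvGen.rel _ _ (Or.inl huv))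
    rcases hxy with h | ⟨h1, h2⟩ | ⟨h1, h2⟩
    · exact hmono _ _ h
    · exact Relation.EqvGen.trans _ _ _
        (Relation.EqvGen.trans _ _ _ (hmono _ _ h1) hab) (hmono _ _ h2)
    · exact Relation.EqvGen.trans _ _ _
        (Relation.EqvGen.trans _ _ _ (hmono _ _ h1) (Relation.EqvGen.symm _ _ hab))
        (hmono _ _ h2)

def pvERel (E : List (Nat × Nat)) (u v : Nat) : Prop := (u, v) ∈ E ∨ (v, u) ∈ E

lemma pvERel_append_single (E : List (Nat × Nat)) (a b u v : Nat) :
    pvERel (E ++ [(a, b)]) u v ↔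
      (pvERel E u v ∨ (u = a ∧ v = b) ∨ (u = b ∧ v = a)) := by
  simp only [pvERel, List.mem_append, List.mem_singleton, Prod.ext_iff]
  tauto

lemma pvEqvGen_congr {α : Type} {r s : α → α → Prop} (h : ∀ x y, r x y ↔ s x y) :
    ∀ x y, Relation.EqvGen r x y ↔ Relation.EqvGen s x y := by
  intro x y
  constructor
  · exact pvEqvGen_mono (fun u v huv => Relation.EqvGen.rel _ _ ((h u v).1 huv)) x y
  · exact pvEqvGen_mono (fun u v huv => Relation.EqvGen.rel _ _ ((h u v).2 huv)) x y

-- ---------- node ids and coordinates ----------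

def pvNodeB (g : List (List Int)) (k : Nat) : Bool :=
  decide (k < g.length * g.length) && decide (pvValN g (k / g.length) (k % g.length) ≠ -1)

def pvCellOf (g : List (List Int)) (k : Nat) : Int × Int :=
  (((k / g.length : Nat) : Int), ((k % g.length : Nat) : Int))

lemma pvId_div (n i j : Nat) (hj : j < n) : (i * n + j) / n = i := by
  rw [Nat.mul_comm i n, Nat.mul_add_div (by omega), Nat.div_eq_of_lt hj]
  omega

lemma pvId_mod (n i j : Nat) (hj : j < n) : (i * n + j) % n = j := by
  rw [Nat.mul_comm i n, Nat.mul_add_mod, Nat.mod_eq_of_lt hj]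

lemma pvId_lt (n i j : Nat) (hi : i < n) (hj : j < n) : i * n + j < n * n := by
  have : (i + 1) * n ≤ n * n := Nat.mul_le_mul (by omega) (by omega)
  have h2 : i * n + j < (i + 1) * n := by
    rw [Nat.succ_mul]
    omega
  omega

lemma pvNodeB_iff (g : List (List Int)) (k : Nat) :
    pvNodeB g k = true ↔ pvFree g (pvCellOf g k) ∧ k < g.length * g.length := by
  unfold pvNodeB pvCellOf pvFree
  simp only [Bool.and_eq_true, decide_eq_true_eq]
  constructor
  · rintro ⟨hk, hv⟩
    have hn : 0 < g.length := by
      rcases Nat.eq_zero_or_pos g.length with h | h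
      · rw [h] at hk; omega
      · exact h
    refine ⟨⟨by positivity, ?_, by positivity, ?_, ?_⟩, hk⟩
    · have : k / g.length < g.length := Nat.div_lt_of_lt_mul (by omega)
      exact_mod_cast Nat.cast_lt.2 this
    · have : k % g.length < g.length := Nat.mod_lt _ hn
      exact_mod_cast Nat.cast_lt.2 this
    · simpa [pvVal] using hv
  · rintro ⟨⟨_, _, _, _, hv⟩, hk⟩
    refine ⟨hk, ?_⟩
    simpa [pvVal] using hv

lemma pvCellOf_id (g : List (List Int)) (i j : Nat) (hi : i < g.length) (hj : j < g.length) :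
    pvCellOf g (i * g.length + j) = ((i : Int), (j : Int)) := by
  unfold pvCellOf
  rw [pvId_div _ _ _ hj, pvId_mod _ _ _ hj]

lemma pvId_cellOf (g : List (List Int)) (k : Nat) (hk : k < g.length * g.length) :
    (k / g.length) * g.length + (k % g.length) = k := by
  rw [Nat.mul_comm, Nat.div_add_mod]


-- ---------- union-find invariant ----------

def pvClassSum (g : List (List Int)) (p : List Nat) (r : Nat) : Int :=
  (((List.range (g.length * g.length)).filter
      (fun k => pvNodeB g k && (pvFindR p k == r))).map
    (fun k => pvValN g (k / g.length) (k % g.length))).sum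

structure pvUInv (g : List (List Int)) (p : List Nat) (cs : List Int) (E : List (Nat × Nat)) :
    Prop where
  plen : p.length = g.length * g.length
  clen : cs.length = g.length * g.length
  mono : ∀ x, p.getD x x ≤ x
  idNon : ∀ x, pvNodeB g x = false → p.getD x x = x
  nodeP : ∀ x, pvNodeB g x = true → pvNodeB g (p.getD x x) = true
  req : ∀ x y, pvFindR p x = pvFindR p y ↔ Relation.EqvGen (pvERel E) x y
  csum : ∀ r, p.getD r r = r → cs.getD r 0 = pvClassSum g p r

lemma pvFindR_node (g : List (List Int)) (p : List Nat) (hm : ∀ x, p.getD x x ≤ x)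
    (hn : ∀ x, pvNodeB g x = true → pvNodeB g (p.getD x x) = true) (x : Nat)
    (hx : pvNodeB g x = true) : pvNodeB g (pvFindR p x) = true := by
  induction x using Nat.strong_induction_on with
  | _ x ih =>
    by_cases hr : p.getD x x = x
    · rwa [pvFindR_of_root p x hr]
    · rw [pvFindR_step p hm x hr]
      exact ih (p.getD x x) (lt_of_le_of_ne (hm x) hr) (hn x hx)

lemma pvSum_filter_or (f : Nat → Int) (pb qb : Nat → Bool)
    (hx : ∀ k, ¬(pb k = true ∧ qb k = true)) :
    ∀ l : List Nat,
      ((l.filter (fun k => pb k || qb k)).map f).sum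
        = ((l.filter pb).map f).sum + ((l.filter qb).map f).sum := by
  intro l
  induction l with
  | nil => simp
  | cons a t ih =>
    by_cases hp : pb a = true
    · have hq : qb a = false := by
        cases h : qb a
        · rfl
        · exact absurd ⟨hp, h⟩ (hx a)
      simp only [List.filter_cons, hp, hq, Bool.or_true, Bool.or_false, if_true, if_false]
      simp only [List.map_cons, List.sum_cons, ih]
      simp only [Bool.false_eq_true, if_false]
      ring
    · have hp' : pb a = false := by
        cases h : pb a
        · rfl
        · exact absurd h hp
      cases hq : qb a
      · simp only [List.filter_cons, hp', hq, Bool.or_false, if_false]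
        exact ih
      · simp only [List.filter_cons, hp', hq, Bool.or_true, if_true, if_false]
        simp only [List.map_cons, List.sum_cons, ih]
        simp only [Bool.false_eq_true, if_false]
        ring

lemma pvFilter_range_eq (c : Nat → Bool) (r : Nat) :
    ∀ N, (List.range N).filter (fun k => c k && (k == r)) =
      if r < N ∧ c r = true then [r] else [] := by
  intro N
  induction N with
  | zero => simp
  | succ N ih =>
    rw [List.range_succ, List.filter_append, ih]
    have hsing : List.filter (fun k => c k && (k == r)) [N] =
        if N = r ∧ c r = true then [r] else [] := by
      by_cases hrN : N = r
      · subst hrN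
        by_cases hc : c N = true
        · simp [hc]
        · simp [hc]
      · simp [hrN]
    rw [hsing]
    by_cases hrN : N = r
    · subst hrN
      by_cases hc : c N = true
      · simp [hc]
      · simp [hc]
    · by_cases hN : r < N
      · have h1 : r < N + 1 := by omega
        by_cases hc : c r = true
        · simp [hrN, hN, h1, hc]
        · simp [hrN, hN, h1, hc]
      · have h1 : ¬ r < N + 1 := by omega
        simp [hrN, hN, h1]

lemma pvRangeGetD (N x : Nat) : (List.range N).getD x x = x := by
  by_cases hx : x < N
  · rw [List.getD_eq_getElem _ _ (by simpa using hx)]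
    simp
  · exact List.getD_eq_default _ _ (by simpa using hx)

lemma pvUnion_spec (g : List (List Int)) (p : List Nat) (cs : List Int) (E : List (Nat × Nat))
    (a b : Nat) (hinv : pvUInv g p cs E)
    (ha : pvNodeB g a = true) (hb : pvNodeB g b = true) :
    pvUInv g (pvUnion (p, cs) a b).1 (pvUnion (p, cs) a b).2 (E ++ [(a, b)]) := by
  have hreqJ : ∀ x y, Relation.EqvGen (pvERel (E ++ [(a, b)])) x y ↔
      (Relation.EqvGen (pvERel E) x y ∨
        (Relation.EqvGen (pvERel E) x a ∧ Relation.EqvGen (pvERel E) b y) ∨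
        (Relation.EqvGen (pvERel E) x b ∧ Relation.EqvGen (pvERel E) a y)) := by
    intro x y
    rw [pvEqvGen_congr (pvERel_append_single E a b) x y]
    exact pvEqvGen_join (pvERel E) a b x y
  by_cases hab : pvFindR p a = pvFindR p b
  · have hU : pvUnion (p, cs) a b = (p, cs) := by
      unfold pvUnion
      rw [if_pos hab]
    rw [hU]
    show pvUInv g p cs (E ++ [(a, b)])
    refine ⟨hinv.plen, hinv.clen, hinv.mono, hinv.idNon, hinv.nodeP, ?_, hinv.csum⟩
    intro x y
    rw [hreqJ x y, ← hinv.req x y, ← hinv.req x a, ← hinv.req b y, ← hinv.req x b,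
      ← hinv.req a y]
    constructor
    · intro h
      exact Or.inl h
    · rintro (h | ⟨h1, h2⟩ | ⟨h1, h2⟩) <;> omega
  · set ra := pvFindR p a with hra
    set rb := pvFindR p b with hrb
    have hra_root : p.getD ra ra = ra := pvFindR_is_root p hinv.mono a
    have hrb_root : p.getD rb rb = rb := pvFindR_is_root p hinv.mono b
    have hra_node : pvNodeB g ra = true := pvFindR_node g p hinv.mono hinv.nodeP a ha
    have hrb_node : pvNodeB g rb = true := pvFindR_node g p hinv.mono hinv.nodeP b hb
    set r1 := min ra rb with hr1
    set r2 := max ra rb with hr2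
    have h12 : r1 < r2 := by
      rcases Nat.lt_or_ge ra rb with h | h
      · rw [hr1, hr2]; omega
      · have : rb < ra := by omega
        rw [hr1, hr2]; omega
    have hr1_root : p.getD r1 r1 = r1 := by
      rcases min_choice ra rb with h | h <;> rw [hr1, h] <;> assumption
    have hr2_root : p.getD r2 r2 = r2 := by
      rcases max_choice ra rb with h | h <;> rw [hr2, h] <;> assumption
    have hr2_node : pvNodeB g r2 = true := by
      rcases max_choice ra rb with h | h <;> rw [hr2, h] <;> assumption
    have hr1_node : pvNodeB g r1 = true := by
      rcases min_choice ra rb with h | h <;> rw [hr1, h] <;> assumption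
    have hr2_lt : r2 < g.length * g.length := ((pvNodeB_iff g r2).1 hr2_node).2
    have hlen : r2 < p.length := by rw [hinv.plen]; exact hr2_lt
    have hU : pvUnion (p, cs) a b =
        (p.set r2 r1, cs.set r1 (cs.getD r1 0 + cs.getD r2 0)) := by
      unfold pvUnion
      rw [if_neg hab]
    rw [hU]
    show pvUInv g (p.set r2 r1) (cs.set r1 (cs.getD r1 0 + cs.getD r2 0)) (E ++ [(a, b)])
    have hF := pvFindR_update p r1 r2 hinv.mono hr1_root hr2_root h12 hlen
    have hmono' := pvMono_update p r1 r2 hinv.mono h12 hlen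
    have hFr1 : pvFindR p r1 = r1 := pvFindR_of_root p r1 hr1_root
    have hFr2 : pvFindR p r2 = r2 := pvFindR_of_root p r2 hr2_root
    have hab12 : (pvFindR p a = r1 ∧ pvFindR p b = r2) ∨
        (pvFindR p a = r2 ∧ pvFindR p b = r1) := by
      rcases Nat.le_total ra rb with h | h
      · left
        exact ⟨by rw [hr1, Nat.min_eq_left h], by rw [hr2, Nat.max_eq_right h]⟩
      · right
        exact ⟨by rw [hr2, Nat.max_eq_left h], by rw [hr1, Nat.min_eq_right h]⟩
    refine ⟨by simpa using hinv.plen, by simpa using hinv.clen, hmono', ?_, ?_, ?_, ?_⟩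
    · intro x hx
      have hx2 : x ≠ r2 := by
        intro h
        rw [h, hr2_node] at hx
        exact absurd hx (by simp)
      rw [pvSetGetD p r2 r1 x hlen]
      rw [if_neg hx2]
      exact hinv.idNon x hx
    · intro x hx
      rw [pvSetGetD p r2 r1 x hlen]
      by_cases hx2 : x = r2
      · rw [if_pos hx2]
        exact hr1_node
      · rw [if_neg hx2]
        exact hinv.nodeP x hx
    · intro x y
      rw [hreqJ x y, hF x, hF y, ← hinv.req x y, ← hinv.req x a, ← hinv.req b y,
        ← hinv.req x b, ← hinv.req a y]
      rcases hab12 with ⟨hfa, hfb⟩ | ⟨hfa, hfb⟩ <;>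
        · rw [hfa, hfb]
          split_ifs <;> omega
    · intro r hroot
      rw [pvSetGetD p r2 r1 r hlen] at hroot
      have hne21 : r2 ≠ r1 := by omega
      by_cases hrr2 : r = r2
      · rw [if_pos hrr2] at hroot
        omega
      · rw [if_neg hrr2] at hroot
        by_cases hrr1 : r = r1
        · rw [hrr1]
          have hset : (cs.set r1 (cs.getD r1 0 + cs.getD r2 0)).getD r1 0 =
              cs.getD r1 0 + cs.getD r2 0 := by
            rw [List.getD_eq_getElem _ _ (by rw [List.length_set, hinv.clen]; omega)]
            rw [List.getElem_set_self]
          rw [hset]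
          have hsplit : pvClassSum g (p.set r2 r1) r1 =
              pvClassSum g p r1 + pvClassSum g p r2 := by
            unfold pvClassSum
            have hcongr : ∀ k ∈ List.range (g.length * g.length),
                (pvNodeB g k && (pvFindR (p.set r2 r1) k == r1))
                  = ((pvNodeB g k && (pvFindR p k == r1)) ||
                     (pvNodeB g k && (pvFindR p k == r2))) := by
              intro k _
              rw [hF k]
              by_cases h2 : pvFindR p k = r2
              · rw [if_pos h2, h2]
                simp [hne21]
              · rw [if_neg h2]
                have hf2 : (pvFindR p k == r2) = false := by simp [h2]
                rw [hf2]
                simp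
            rw [List.filter_congr hcongr]
            apply pvSum_filter_or
            intro k hk
            obtain ⟨hk1, hk2⟩ := hk
            simp only [Bool.and_eq_true, beq_iff_eq] at hk1 hk2
            exact hne21 (hk2.2.symm.trans hk1.2)
          rw [hsplit, hinv.csum r1 hr1_root, hinv.csum r2 hr2_root]
        · have hset : (cs.set r1 (cs.getD r1 0 + cs.getD r2 0)).getD r 0 = cs.getD r 0 := by
            rw [List.getD_eq_getElem?_getD, List.getElem?_set_ne (fun h => hrr1 h.symm),
              ← List.getD_eq_getElem?_getD]
          rw [hset]
          have hcongr : ∀ k ∈ List.range (g.length * g.length),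
              (pvNodeB g k && (pvFindR (p.set r2 r1) k == r))
                = (pvNodeB g k && (pvFindR p k == r)) := by
            intro k _
            rw [hF k]
            by_cases h2 : pvFindR p k = r2
            · rw [if_pos h2, h2]
              have e1 : (r1 == r) = false := by
                simp only [beq_eq_false_iff_ne, ne_eq]
                intro h
                exact hrr1 h.symm
              have e2 : (r2 == r) = false := by
                simp only [beq_eq_false_iff_ne, ne_eq]
                intro h
                exact hrr2 h.symm
              rw [e1, e2]
            · rw [if_neg h2]
          unfold pvClassSum
          rw [List.filter_congr hcongr]
          exact hinv.csum r hroot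

-- ---------- generic fold helpers ----------

lemma pvFoldl_if_add {α : Type} (P : α → Prop) [DecidablePred P] (f : α → Int) :
    ∀ (l : List α) (t0 : Int),
      l.foldl (fun t p => if P p then t + f p else t) t0
        = t0 + ((l.filter (fun p => decide (P p))).map f).sum := by
  intro l
  induction l with
  | nil => intro t0; simp
  | cons a t ih =>
    intro t0
    rw [List.foldl_cons]
    by_cases hp : P a
    · rw [if_pos hp]
      rw [ih (t0 + f a)]
      simp [hp]
      ring
    · rw [if_neg hp]
      rw [ih t0]
      simp [hp]

-- ---------- pvInit characterization ----------

lemma pvId_inj (n i j a b : Nat) (hj : j < n) (hb : b < n) :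
    i * n + j = a * n + b ↔ i = a ∧ j = b := by
  constructor
  · intro h
    have h1 : (i * n + j) / n = (a * n + b) / n := by rw [h]
    have h2 : (i * n + j) % n = (a * n + b) % n := by rw [h]
    rw [pvId_div n i j hj, pvId_div n a b hb] at h1
    rw [pvId_mod n i j hj, pvId_mod n a b hb] at h2
    exact ⟨h1, h2⟩
  · rintro ⟨rfl, rfl⟩
    rfl

lemma pvInit_fold_char (g : List (List Int)) :
    ∀ (rem done : List (Nat × Nat)) (st : List Int × Int),
    (∀ p ∈ rem, p.1 < g.length ∧ p.2 < g.length) →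
    st.1.length = g.length * g.length →
    (∀ i j : Nat, i < g.length → j < g.length →
      st.1.getD (i * g.length + j) 0 =
        if (i, j) ∈ done ∧ pvValN g i j ≠ -1 then pvValN g i j else 0) →
    (rem.foldl (fun (st : List Int × Int) p =>
        if pvValN g p.1 p.2 ≠ -1 then
          (st.1.set (p.1 * g.length + p.2) (pvValN g p.1 p.2), st.2 + pvValN g p.1 p.2)
        else st) st).1.length = g.length * g.length ∧
    (∀ i j : Nat, i < g.length → j < g.length →
      (rem.foldl (fun (st : List Int × Int) p =>
        if pvValN g p.1 p.2 ≠ -1 then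
          (st.1.set (p.1 * g.length + p.2) (pvValN g p.1 p.2), st.2 + pvValN g p.1 p.2)
        else st) st).1.getD (i * g.length + j) 0 =
        if (i, j) ∈ done ++ rem ∧ pvValN g i j ≠ -1 then pvValN g i j else 0) := by
  intro rem
  induction rem with
  | nil =>
    intro done st _ hlen hchar
    refine ⟨hlen, ?_⟩
    intro i j hi hj
    rw [List.foldl_nil, hchar i j hi hj, List.append_nil]
  | cons q rest ih =>
    intro done st hrem hlen hchar
    obtain ⟨a, b⟩ := q
    have hab := hrem (a, b) (by simp)
    simp only at hab
    rw [List.foldl_cons]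
    by_cases hv : pvValN g a b ≠ -1
    · rw [if_pos hv]
      have hidlt : a * g.length + b < g.length * g.length := pvId_lt _ _ _ hab.1 hab.2
      have h1 := ih (done ++ [(a, b)])
        (st.1.set (a * g.length + b) (pvValN g a b), st.2 + pvValN g a b)
        (fun p hp => hrem p (by simp [hp]))
        (by simpa using hlen)
        (by intro i j hi hj
            simp only
            by_cases heq : (i, j) = (a, b)
            · obtain ⟨rfl, rfl⟩ := Prod.ext_iff.1 heq
              rw [List.getD_eq_getElem _ _ (by rw [List.length_set, hlen]; exact hidlt),
                List.getElem_set_self]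
              simp [hv]
            · have hne : i * g.length + j ≠ a * g.length + b := by
                rw [Ne, pvId_inj g.length i j a b hj hab.2]
                intro ⟨h1, h2⟩
                exact heq (by rw [h1, h2])
              rw [List.getD_eq_getElem?_getD, List.getElem?_set_ne (fun h => hne h.symm),
                ← List.getD_eq_getElem?_getD, hchar i j hi hj]
              have : ((i, j) ∈ done ++ [(a, b)]) ↔ ((i, j) ∈ done) := by
                simp [heq]
              simp only [this])
      refine ⟨h1.1, ?_⟩
      intro i j hi hj
      rw [h1.2 i j hi hj]
      have hmm : ((i, j) ∈ done ++ [(a, b)] ++ rest) ↔ ((i, j) ∈ done ++ (a, b) :: rest) := by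
        simp only [List.mem_append, List.mem_singleton, List.mem_cons]
        tauto
      simp only [hmm]
    · rw [if_neg hv]
      have h1 := ih (done ++ [(a, b)]) st
        (fun p hp => hrem p (by simp [hp])) hlen
        (by intro i j hi hj
            rw [hchar i j hi hj]
            by_cases heq : (i, j) = (a, b)
            · obtain ⟨rfl, rfl⟩ := Prod.ext_iff.1 heq
              simp only [not_not] at hv
              simp [hv]
            · have : ((i, j) ∈ done ++ [(a, b)]) ↔ ((i, j) ∈ done) := by
                simp [heq]
              simp only [this])
      refine ⟨h1.1, ?_⟩
      intro i j hi hj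
      rw [h1.2 i j hi hj]
      have hmm : ((i, j) ∈ done ++ [(a, b)] ++ rest) ↔ ((i, j) ∈ done ++ (a, b) :: rest) := by
        simp only [List.mem_append, List.mem_singleton, List.mem_cons]
        tauto
      simp only [hmm]


-- ---------- pvInit flattening and second component ----------

lemma pvInit_eq (g : List (List Int)) :
    pvInit g g.length = (pvPos g.length).foldl (fun (st : List Int × Int) p =>
        if pvValN g p.1 p.2 ≠ -1 then
          (st.1.set (p.1 * g.length + p.2) (pvValN g p.1 p.2), st.2 + pvValN g p.1 p.2)
        else st) (List.replicate (g.length * g.length) 0, 0) := by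
  unfold pvInit
  exact pvNested_foldl g.length (fun st i j =>
    if pvValN g i j ≠ -1 then
      (st.1.set (i * g.length + j) (pvValN g i j), st.2 + pvValN g i j)
    else st) (List.replicate (g.length * g.length) 0, 0)

lemma pvGridSum_eq (g : List (List Int)) :
    pvGridSum g g.length = (pvPos g.length).foldl (fun s p =>
      if pvValN g p.1 p.2 ≠ -1 then s + pvValN g p.1 p.2 else s) 0 := by
  unfold pvGridSum
  exact pvNested_foldl g.length (fun s i j =>
    if pvValN g i j ≠ -1 then s + pvValN g i j else s) 0

lemma pvPair_fold_snd (g : List (List Int)) :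
    ∀ (l : List (Nat × Nat)) (st : List Int × Int),
      (l.foldl (fun (st : List Int × Int) p =>
        if pvValN g p.1 p.2 ≠ -1 then
          (st.1.set (p.1 * g.length + p.2) (pvValN g p.1 p.2), st.2 + pvValN g p.1 p.2)
        else st) st).2
      = l.foldl (fun s p =>
          if pvValN g p.1 p.2 ≠ -1 then s + pvValN g p.1 p.2 else s) st.2 := by
  intro l
  induction l with
  | nil => intro st; rfl
  | cons q rest ih =>
    intro st
    rw [List.foldl_cons, List.foldl_cons]
    by_cases hv : pvValN g q.1 q.2 ≠ -1
    · rw [if_pos hv, if_pos hv, ih]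
    · rw [if_neg hv, if_neg hv, ih]

lemma pvInit_snd (g : List (List Int)) : (pvInit g g.length).2 = pvGridSum g g.length := by
  rw [pvInit_eq, pvGridSum_eq, pvPair_fold_snd]

lemma pvInit_char (g : List (List Int)) :
    (pvInit g g.length).1.length = g.length * g.length ∧
    (∀ i j : Nat, i < g.length → j < g.length →
      (pvInit g g.length).1.getD (i * g.length + j) 0 =
        if pvValN g i j ≠ -1 then pvValN g i j else 0) := by
  rw [pvInit_eq]
  have h := pvInit_fold_char g (pvPos g.length) []
    (List.replicate (g.length * g.length) 0, 0)
    (fun p hp => (pvMem_pvPos g.length p).1 hp)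
    (by simp)
    (by intro i j hi hj
        simp)
  refine ⟨h.1, ?_⟩
  intro i j hi hj
  rw [h.2 i j hi hj]
  have : ((i, j) ∈ ([] : List (Nat × Nat)) ++ pvPos g.length) := by
    simp [pvMem_pvPos, hi, hj]
  simp only [this, true_and]

-- ---------- id-level adjacency and the connectivity bridge ----------

def pvAdjId (g : List (List Int)) (u v : Nat) : Prop :=
  pvNodeB g u = true ∧ pvNodeB g v = true ∧ pvAdj g (pvCellOf g u) (pvCellOf g v)

lemma pvFree_node (g : List (List Int)) (c : Int × Int) (hf : pvFree g c) :
    pvNodeB g (c.1.toNat * g.length + c.2.toNat) = true ∧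
    pvCellOf g (c.1.toNat * g.length + c.2.toNat) = c := by
  have hlt := pvFree_lt g c hf
  have hcell : pvCellOf g (c.1.toNat * g.length + c.2.toNat) = c := by
    rw [pvCellOf_id g _ _ hlt.1 hlt.2]
    exact pvCellRebuild c hf.1 hf.2.2.1
  refine ⟨?_, hcell⟩
  rw [pvNodeB_iff]
  rw [hcell]
  exact ⟨hf, pvId_lt _ _ _ hlt.1 hlt.2⟩

lemma pvConn_to_eqvgen (g : List (List Int)) (c d : Int × Int)
    (hconn : pvConn g c d) (hc : pvFree g c) :
    Relation.EqvGen (pvAdjId g)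
      (c.1.toNat * g.length + c.2.toNat) (d.1.toNat * g.length + d.2.toNat) := by
  induction hconn with
  | refl => exact Relation.EqvGen.refl _
  | tail hcb hadj ih =>
    rename_i b e
    have hbf : pvFree g b := by
      cases hcb with
      | refl => exact hc
      | tail _ hadj' => exact hadj'.2.1
    have hef : pvFree g e := hadj.2.1
    refine Relation.EqvGen.trans _ _ _ ih (Relation.EqvGen.rel _ _ ?_)
    refine ⟨(pvFree_node g b hbf).1, (pvFree_node g e hef).1, ?_⟩
    rw [(pvFree_node g b hbf).2, (pvFree_node g e hef).2]
    exact hadj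

lemma pvEqvgen_to_conn (g : List (List Int)) (u v : Nat)
    (h : Relation.EqvGen (pvAdjId g) u v) :
    pvConn g (pvCellOf g u) (pvCellOf g v) := by
  induction h with
  | rel a b hab => exact Relation.ReflTransGen.single hab.2.2
  | refl a => exact Relation.ReflTransGen.refl
  | symm a b _ ih => exact pvConn_symm g ih
  | trans a b c _ _ ih1 ih2 => exact ih1.trans ih2

-- ---------- processing the edge scan ----------

def pvSoundE (g : List (List Int)) (E : List (Nat × Nat)) : Prop :=
  ∀ e ∈ E, pvAdjId g e.1 e.2

def pvCoverE (g : List (List Int)) (done : List (Nat × Nat)) (E : List (Nat × Nat)) : Prop :=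
  ∀ i j : Nat, (i, j) ∈ done → pvValN g i j ≠ -1 → i < g.length → j < g.length →
    (i + 1 < g.length → pvValN g (i + 1) j ≠ -1 →
      (i * g.length + j, i * g.length + j + g.length) ∈ E) ∧
    (j + 1 < g.length → pvValN g i (j + 1) ≠ -1 →
      (i * g.length + j, i * g.length + j + 1) ∈ E)


lemma pvNode_at (g : List (List Int)) (i j : Nat) (hi : i < g.length) (hj : j < g.length)
    (hv : pvValN g i j ≠ -1) : pvNodeB g (i * g.length + j) = true := by
  rw [pvNodeB_iff, pvCellOf_id g i j hi hj]
  refine ⟨⟨by positivity, by exact_mod_cast Nat.cast_lt.2 hi, by positivity,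
    by exact_mod_cast Nat.cast_lt.2 hj, ?_⟩, pvId_lt _ _ _ hi hj⟩
  rw [pvVal_natCast]
  exact hv

lemma pvAdjId_down (g : List (List Int)) (i j : Nat) (hi1 : i + 1 < g.length)
    (hj : j < g.length) (hv1 : pvValN g i j ≠ -1) (hv2 : pvValN g (i + 1) j ≠ -1) :
    pvAdjId g (i * g.length + j) (i * g.length + j + g.length) := by
  have hi : i < g.length := by omega
  have heq : i * g.length + j + g.length = (i + 1) * g.length + j := by
    rw [Nat.succ_mul]
    omega
  have h1 := pvNode_at g i j hi hj hv1
  have h2 := pvNode_at g (i + 1) j hi1 hj hv2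
  have hf1 : pvFree g (((i : Nat) : Int), ((j : Nat) : Int)) := by
    have := ((pvNodeB_iff g _).1 h1).1
    rwa [pvCellOf_id g i j hi hj] at this
  have hf2 : pvFree g (((i + 1 : Nat) : Int), ((j : Nat) : Int)) := by
    have := ((pvNodeB_iff g _).1 h2).1
    rwa [pvCellOf_id g (i + 1) j hi1 hj] at this
  rw [heq]
  refine ⟨h1, h2, ?_⟩
  rw [pvCellOf_id g i j hi hj, pvCellOf_id g (i + 1) j hi1 hj]
  refine ⟨hf1, hf2, Or.inl ⟨?_, rfl⟩⟩
  push_cast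
  ring

lemma pvAdjId_right (g : List (List Int)) (i j : Nat) (hi : i < g.length)
    (hj1 : j + 1 < g.length) (hv1 : pvValN g i j ≠ -1) (hv2 : pvValN g i (j + 1) ≠ -1) :
    pvAdjId g (i * g.length + j) (i * g.length + j + 1) := by
  have hj : j < g.length := by omega
  have heq : i * g.length + j + 1 = i * g.length + (j + 1) := by omega
  have h1 := pvNode_at g i j hi hj hv1
  have h2 := pvNode_at g i (j + 1) hi hj1 hv2
  have hf1 : pvFree g (((i : Nat) : Int), ((j : Nat) : Int)) := by
    have := ((pvNodeB_iff g _).1 h1).1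
    rwa [pvCellOf_id g i j hi hj] at this
  have hf2 : pvFree g (((i : Nat) : Int), ((j + 1 : Nat) : Int)) := by
    have := ((pvNodeB_iff g _).1 h2).1
    rwa [pvCellOf_id g i (j + 1) hi hj1] at this
  rw [heq]
  refine ⟨h1, h2, ?_⟩
  rw [pvCellOf_id g i j hi hj, pvCellOf_id g i (j + 1) hi hj1]
  refine ⟨hf1, hf2, Or.inr (Or.inr (Or.inl ⟨rfl, ?_⟩))⟩
  push_cast
  ring

lemma pvUF_fold_spec (g : List (List Int)) :
    ∀ (rem : List (Nat × Nat)) (done : List (Nat × Nat)) (st : List Nat × List Int)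
      (E : List (Nat × Nat)),
    (∀ q ∈ rem, q.1 < g.length ∧ q.2 < g.length) →
    pvUInv g st.1 st.2 E → pvSoundE g E → pvCoverE g done E →
    ∃ E', pvUInv g (rem.foldl (fun (st : List Nat × List Int) q =>
        if pvValN g q.1 q.2 ≠ -1 then
          (if q.2 + 1 < g.length ∧ pvValN g q.1 (q.2 + 1) ≠ -1 then
            pvUnion (if q.1 + 1 < g.length ∧ pvValN g (q.1 + 1) q.2 ≠ -1 then
                pvUnion st (q.1 * g.length + q.2) (q.1 * g.length + q.2 + g.length)
              else st) (q.1 * g.length + q.2) (q.1 * g.length + q.2 + 1)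
          else (if q.1 + 1 < g.length ∧ pvValN g (q.1 + 1) q.2 ≠ -1 then
              pvUnion st (q.1 * g.length + q.2) (q.1 * g.length + q.2 + g.length)
            else st))
        else st) st).1 (rem.foldl (fun (st : List Nat × List Int) q =>
        if pvValN g q.1 q.2 ≠ -1 then
          (if q.2 + 1 < g.length ∧ pvValN g q.1 (q.2 + 1) ≠ -1 then
            pvUnion (if q.1 + 1 < g.length ∧ pvValN g (q.1 + 1) q.2 ≠ -1 then
                pvUnion st (q.1 * g.length + q.2) (q.1 * g.length + q.2 + g.length)
              else st) (q.1 * g.length + q.2) (q.1 * g.length + q.2 + 1)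
          else (if q.1 + 1 < g.length ∧ pvValN g (q.1 + 1) q.2 ≠ -1 then
              pvUnion st (q.1 * g.length + q.2) (q.1 * g.length + q.2 + g.length)
            else st))
        else st) st).2 E' ∧
      pvSoundE g E' ∧ pvCoverE g (done ++ rem) E' ∧ (∀ e ∈ E, e ∈ E') := by
  intro rem
  induction rem with
  | nil =>
    intro done st E _ hinv hsound hcov
    exact ⟨E, by simpa using hinv, hsound, by simpa using hcov, fun e he => he⟩
  | cons q rest ih =>
    intro done st E hrem hinv hsound hcov
    obtain ⟨i, j⟩ := q
    obtain ⟨p, cs⟩ := st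
    have hij := hrem (i, j) (by simp)
    simp only at hij
    rw [List.foldl_cons]
    by_cases hv : pvValN g i j ≠ -1
    · rw [if_pos hv]
      have hk_node := pvNode_at g i j hij.1 hij.2 hv
      -- first (down) union
      have hstep1 : ∃ (st1 : List Nat × List Int) (E1 : List (Nat × Nat)), (if i + 1 < g.length ∧ pvValN g (i + 1) j ≠ -1 then
            pvUnion (p, cs) (i * g.length + j) (i * g.length + j + g.length)
          else (p, cs)) = st1 ∧
          pvUInv g st1.1 st1.2 E1 ∧ pvSoundE g E1 ∧ (∀ e ∈ E, e ∈ E1) ∧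
          (i + 1 < g.length → pvValN g (i + 1) j ≠ -1 →
            (i * g.length + j, i * g.length + j + g.length) ∈ E1) := by
        by_cases hd : i + 1 < g.length ∧ pvValN g (i + 1) j ≠ -1
        · have hadj := pvAdjId_down g i j hd.1 hij.2 hv hd.2
          have hkn_node : pvNodeB g (i * g.length + j + g.length) = true := hadj.2.1
          refine ⟨_, E ++ [(i * g.length + j, i * g.length + j + g.length)],
            if_pos hd, pvUnion_spec g p cs E _ _ hinv hk_node hkn_node, ?_, ?_, ?_⟩
          · intro e he
            rcases List.mem_append.1 he with h | h
            · exact hsound e h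
            · rw [List.mem_singleton] at h
              subst h
              exact hadj
          · intro e he
            exact List.mem_append.2 (Or.inl he)
          · intro _ _
            exact List.mem_append.2 (Or.inr (by simp))
        · exact ⟨(p, cs), E, if_neg hd, hinv, hsound, fun e he => he,
            fun h1 h2 => absurd ⟨h1, h2⟩ hd⟩
      obtain ⟨st1, E1, hs1, hinv1, hsound1, hsub1, hdown1⟩ := hstep1
      -- second (right) union
      have hstep2 : ∃ (st2 : List Nat × List Int) (E2 : List (Nat × Nat)), (if j + 1 < g.length ∧ pvValN g i (j + 1) ≠ -1 then
            pvUnion st1 (i * g.length + j) (i * g.length + j + 1)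
          else st1) = st2 ∧
          pvUInv g st2.1 st2.2 E2 ∧ pvSoundE g E2 ∧ (∀ e ∈ E1, e ∈ E2) ∧
          (j + 1 < g.length → pvValN g i (j + 1) ≠ -1 →
            (i * g.length + j, i * g.length + j + 1) ∈ E2) := by
        by_cases hr : j + 1 < g.length ∧ pvValN g i (j + 1) ≠ -1
        · have hadj := pvAdjId_right g i j hij.1 hr.1 hv hr.2
          have hk1_node : pvNodeB g (i * g.length + j + 1) = true := hadj.2.1
          obtain ⟨p1, cs1⟩ := st1
          refine ⟨_, E1 ++ [(i * g.length + j, i * g.length + j + 1)],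
            if_pos hr, pvUnion_spec g p1 cs1 E1 _ _ hinv1 hk_node hk1_node, ?_, ?_, ?_⟩
          · intro e he
            rcases List.mem_append.1 he with h | h
            · exact hsound1 e h
            · rw [List.mem_singleton] at h
              subst h
              exact hadj
          · intro e he
            exact List.mem_append.2 (Or.inl he)
          · intro _ _
            exact List.mem_append.2 (Or.inr (by simp))
        · exact ⟨st1, E1, if_neg hr, hinv1, hsound1, fun e he => he,
            fun h1 h2 => absurd ⟨h1, h2⟩ hr⟩
      obtain ⟨st2, E2, hs2, hinv2, hsound2, hsub2, hright2⟩ := hstep2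
      rw [hs1, hs2]
      obtain ⟨E', hinv', hsound', hcov', hsub'⟩ := ih (done ++ [(i, j)]) st2 E2
        (fun q hq => hrem q (by simp [hq])) hinv2 hsound2
        (by intro a b hab hvab ha hb
            rcases List.mem_append.1 hab with h | h
            · obtain ⟨h1, h2⟩ := hcov a b h hvab ha hb
              exact ⟨fun u v => hsub2 _ (hsub1 _ (h1 u v)),
                fun u v => hsub2 _ (hsub1 _ (h2 u v))⟩
            · rw [List.mem_singleton] at h
              obtain ⟨rfl, rfl⟩ := Prod.ext_iff.1 h
              exact ⟨fun u v => hsub2 _ (hdown1 u v), hright2⟩)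
      refine ⟨E', hinv', hsound', ?_, fun e he => hsub' e (hsub2 e (hsub1 e he))⟩
      intro a b hab hvab ha hb
      apply hcov'
      · simp only [List.mem_append, List.mem_cons] at hab ⊢
        tauto
      · exact hvab
      · exact ha
      · exact hb
    · rw [if_neg hv]
      obtain ⟨E', hinv', hsound', hcov', hsub'⟩ := ih (done ++ [(i, j)]) (p, cs) E
        (fun q hq => hrem q (by simp [hq])) hinv hsound
        (by intro a b hab hvab ha hb
            rcases List.mem_append.1 hab with h | h
            · exact hcov a b h hvab ha hb
            · rw [List.mem_singleton] at h
              obtain ⟨rfl, rfl⟩ := Prod.ext_iff.1 h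
              exact absurd hvab hv)
      refine ⟨E', hinv', hsound', ?_, hsub'⟩
      intro a b hab hvab ha hb
      apply hcov'
      · simp only [List.mem_append, List.mem_cons] at hab ⊢
        tauto
      · exact hvab
      · exact ha
      · exact hb


-- ---------- initial union-find state ----------

lemma pvUInv_init (g : List (List Int)) :
    pvUInv g (List.range (g.length * g.length)) (pvInit g g.length).1 [] := by
  have hroot : ∀ x, (List.range (g.length * g.length)).getD x x = x :=
    pvRangeGetD (g.length * g.length)
  have hfind : ∀ x, pvFindR (List.range (g.length * g.length)) x = x :=
    fun x => pvFindR_of_root _ x (hroot x)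
  refine ⟨by simp, (pvInit_char g).1, fun x => le_of_eq (hroot x), fun x _ => hroot x,
    fun x hx => by rwa [hroot x], ?_, ?_⟩
  · intro x y
    rw [hfind x, hfind y]
    constructor
    · rintro rfl
      exact Relation.EqvGen.refl x
    · intro h
      exact pvEqvGen_empty (by intro u v h; simp [pvERel] at h) x y h
  · intro r _
    unfold pvClassSum
    have hcongr : ∀ k ∈ List.range (g.length * g.length),
        (pvNodeB g k && (pvFindR (List.range (g.length * g.length)) k == r))
          = (pvNodeB g k && (k == r)) := by
      intro k _
      rw [hfind k]
    rw [List.filter_congr hcongr, pvFilter_range_eq (pvNodeB g) r]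
    by_cases hr : r < g.length * g.length ∧ pvNodeB g r = true
    · rw [if_pos hr]
      have hn : 0 < g.length := by
        rcases Nat.eq_zero_or_pos g.length with h | h
        · exfalso; rw [h] at hr; omega
        · exact h
      have hi : r / g.length < g.length := Nat.div_lt_of_lt_mul (by omega)
      have hj : r % g.length < g.length := Nat.mod_lt _ hn
      have hid := pvId_cellOf g r hr.1
      have hchar := (pvInit_char g).2 (r / g.length) (r % g.length) hi hj
      rw [hid] at hchar
      rw [hchar]
      have hvr : pvValN g (r / g.length) (r % g.length) ≠ -1 := by
        have := hr.2
        unfold pvNodeB at this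
        simp only [Bool.and_eq_true, decide_eq_true_eq] at this
        exact this.2
      rw [if_pos hvr]
      simp
    · rw [if_neg hr]
      simp only [List.map_nil, List.sum_nil]
      by_cases hrN : r < g.length * g.length
      · have hnode : pvNodeB g r = false := by
          cases h : pvNodeB g r
          · rfl
          · exact absurd ⟨hrN, h⟩ hr
        have hn : 0 < g.length := by
          rcases Nat.eq_zero_or_pos g.length with h | h
          · exfalso; rw [h] at hrN; omega
          · exact h
        have hi : r / g.length < g.length := Nat.div_lt_of_lt_mul (by omega)
        have hj : r % g.length < g.length := Nat.mod_lt _ hn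
        have hid := pvId_cellOf g r hrN
        have hchar := (pvInit_char g).2 (r / g.length) (r % g.length) hi hj
        rw [hid] at hchar
        rw [hchar]
        have hvr : ¬ pvValN g (r / g.length) (r % g.length) ≠ -1 := by
          unfold pvNodeB at hnode
          simp only [Bool.and_eq_false_iff, decide_eq_false_iff_not] at hnode
          rcases hnode with h | h
          · exact absurd hrN h
          · simpa using h
        rw [if_neg hvr]
      · rw [List.getD_eq_default _ _ (by rw [(pvInit_char g).1]; omega)]

-- ---------- pvUF flattening ----------

lemma pvUF_eq (g : List (List Int)) (cs0 : List Int) :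
    pvUF g g.length cs0 = (pvPos g.length).foldl (fun (st : List Nat × List Int) q =>
        if pvValN g q.1 q.2 ≠ -1 then
          (if q.2 + 1 < g.length ∧ pvValN g q.1 (q.2 + 1) ≠ -1 then
            pvUnion (if q.1 + 1 < g.length ∧ pvValN g (q.1 + 1) q.2 ≠ -1 then
                pvUnion st (q.1 * g.length + q.2) (q.1 * g.length + q.2 + g.length)
              else st) (q.1 * g.length + q.2) (q.1 * g.length + q.2 + 1)
          else (if q.1 + 1 < g.length ∧ pvValN g (q.1 + 1) q.2 ≠ -1 then
              pvUnion st (q.1 * g.length + q.2) (q.1 * g.length + q.2 + g.length)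
            else st))
        else st) (List.range (g.length * g.length), cs0) := by
  unfold pvUF
  exact pvNested_foldl g.length (fun st i j =>
    if pvValN g i j ≠ -1 then
      (if j + 1 < g.length ∧ pvValN g i (j + 1) ≠ -1 then
        pvUnion (if i + 1 < g.length ∧ pvValN g (i + 1) j ≠ -1 then
            pvUnion st (i * g.length + j) (i * g.length + j + g.length)
          else st) (i * g.length + j) (i * g.length + j + 1)
      else (if i + 1 < g.length ∧ pvValN g (i + 1) j ≠ -1 then
          pvUnion st (i * g.length + j) (i * g.length + j + g.length)
        else st))
    else st) (List.range (g.length * g.length), cs0)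

-- ---------- completeness of the scanned edges ----------

lemma pvCover_complete (g : List (List Int)) (E : List (Nat × Nat))
    (hcov : pvCoverE g (pvPos g.length) E) :
    ∀ u v, pvAdjId g u v → pvERel E u v := by
  intro u v huv
  obtain ⟨hu, hv, hadj⟩ := huv
  obtain ⟨hufree, huN⟩ := (pvNodeB_iff g u).1 hu
  obtain ⟨hvfree, hvN⟩ := (pvNodeB_iff g v).1 hv
  have hn : 0 < g.length := by
    rcases Nat.eq_zero_or_pos g.length with h | h
    · exfalso; rw [h] at huN; omega
    · exact h
  have hui : u / g.length < g.length := Nat.div_lt_of_lt_mul (by omega)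
  have huj : u % g.length < g.length := Nat.mod_lt _ hn
  have hvi : v / g.length < g.length := Nat.div_lt_of_lt_mul (by omega)
  have hvj : v % g.length < g.length := Nat.mod_lt _ hn
  have huid := pvId_cellOf g u huN
  have hvid := pvId_cellOf g v hvN
  have huval : pvValN g (u / g.length) (u % g.length) ≠ -1 := by
    have := hufree.2.2.2.2
    unfold pvCellOf at this
    rwa [pvVal_natCast] at this
  have hvval : pvValN g (v / g.length) (v % g.length) ≠ -1 := by
    have := hvfree.2.2.2.2
    unfold pvCellOf at this
    rwa [pvVal_natCast] at this
  have hmul : (u / g.length + 1) * g.length = u / g.length * g.length + g.length :=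
    Nat.succ_mul _ _
  have hmul' : (v / g.length + 1) * g.length = v / g.length * g.length + g.length :=
    Nat.succ_mul _ _
  unfold pvCellOf at hadj
  obtain ⟨_, _, hdir⟩ := hadj
  rcases hdir with ⟨h1, h2⟩ | ⟨h1, h2⟩ | ⟨h1, h2⟩ | ⟨h1, h2⟩ <;> simp only at h1 h2
  · -- v is one row below u
    have ha : v / g.length = u / g.length + 1 := by omega
    have hb : v % g.length = u % g.length := by omega
    have hc := (hcov (u / g.length) (u % g.length)
      (by rw [pvMem_pvPos]; exact ⟨hui, huj⟩) huval hui huj).1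
      (by omega) (by rw [← ha, ← hb]; exact hvval)
    left
    rw [huid] at hc
    have hB : v / g.length * g.length = u / g.length * g.length + g.length := by
      rw [ha, Nat.succ_mul]
    have : u + g.length = v := by omega
    rwa [this] at hc
  · -- v is one row above u
    have ha : u / g.length = v / g.length + 1 := by omega
    have hb : u % g.length = v % g.length := by omega
    have hc := (hcov (v / g.length) (v % g.length)
      (by rw [pvMem_pvPos]; exact ⟨hvi, hvj⟩) hvval hvi hvj).1
      (by omega) (by rw [← ha, ← hb]; exact huval)
    right
    rw [hvid] at hc
    have hB : u / g.length * g.length = v / g.length * g.length + g.length := by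
      rw [ha, Nat.succ_mul]
    have : v + g.length = u := by omega
    rwa [this] at hc
  · -- v is one column right of u
    have ha : v / g.length = u / g.length := by omega
    have hb : v % g.length = u % g.length + 1 := by omega
    have hbu : u % g.length + 1 < g.length := by omega
    have hc := (hcov (u / g.length) (u % g.length)
      (by rw [pvMem_pvPos]; exact ⟨hui, huj⟩) huval hui huj).2
      hbu (by rw [← ha, ← hb]; exact hvval)
    left
    rw [huid] at hc
    have hB : v / g.length * g.length = u / g.length * g.length := by rw [ha]
    have : u + 1 = v := by omega
    rwa [this] at hc
  · -- v is one column left of u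
    have ha : u / g.length = v / g.length := by omega
    have hb : u % g.length = v % g.length + 1 := by omega
    have hbv : v % g.length + 1 < g.length := by omega
    have hc := (hcov (v / g.length) (v % g.length)
      (by rw [pvMem_pvPos]; exact ⟨hvi, hvj⟩) hvval hvi hvj).2
      hbv (by rw [← ha, ← hb]; exact huval)
    right
    rw [hvid] at hc
    have hB : u / g.length * g.length = v / g.length * g.length := by rw [ha]
    have : v + 1 = u := by omega
    rwa [this] at hc


-- ---------- outer-loop summary and value formulas ----------

lemma pvMget_replicate (n a b : Nat) :
    pvMget (List.replicate n (List.replicate n false)) a b = false := by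
  unfold pvMget
  by_cases ha : a < n
  · have h1 : (List.replicate n (List.replicate n false)).getD a [] =
        List.replicate n false := by
      rw [List.getD_eq_getElem _ _ (by simpa using ha), List.getElem_replicate]
    rw [h1]
    by_cases hb : b < n
    · rw [List.getD_eq_getElem _ _ (by simpa using hb), List.getElem_replicate]
    · exact List.getD_eq_default _ _ (by simpa using hb)
  · have h1 : (List.replicate n (List.replicate n false)).getD a [] = [] :=
      List.getD_eq_default _ _ (by simpa using ha)
    rw [h1]
    simp

lemma pvOuter_eq (g : List (List Int)) :
    pvOuter g g.length = (pvPos g.length).foldl (fun st p =>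
        if pvValN g p.1 p.2 ≠ -1 ∧ pvMget st.1 p.1 p.2 = false then
          ((pvBfs g g.length p.1 p.2 st.1).2.2,
            st.2 ++ [((pvBfs g g.length p.1 p.2 st.1).1, (pvBfs g g.length p.1 p.2 st.1).2.1)])
        else st)
      (List.replicate g.length (List.replicate g.length false), []) := by
  unfold pvOuter
  exact pvNested_foldl g.length (fun st i j =>
    if pvValN g i j ≠ -1 ∧ pvMget st.1 i j = false then
      ((pvBfs g g.length i j st.1).2.2,
        st.2 ++ [((pvBfs g g.length i j st.1).1, (pvBfs g g.length i j st.1).2.1)])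
    else st) (List.replicate g.length (List.replicate g.length false), [])

lemma pvOuter_spec (g : List (List Int)) :
    pvOInv g (pvOuter g g.length) ∧
    (∀ c, pvFree g c → ∃ pc ∈ (pvOuter g g.length).2, c ∈ pc.1) := by
  have hinit : pvOInv g (List.replicate g.length (List.replicate g.length false),
      ([] : List (List (Int × Int) × Int))) := by
    refine ⟨pvShape_replicate g.length, ?_, ?_, ?_, by simp, by simp⟩
    · intro a b hm
      rw [pvMget_replicate] at hm
      exact absurd hm (by simp)
    · intro a b hm
      rw [pvMget_replicate] at hm
      exact absurd hm (by simp)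
    · intro a b
      rw [pvMget_replicate]
      simp
  obtain ⟨hinv, hmono, hcov⟩ := pvOuter_fold_spec g (pvPos g.length)
    (List.replicate g.length (List.replicate g.length false), [])
    (fun p hp => (pvMem_pvPos g.length p).1 hp) hinit
  rw [pvOuter_eq]
  refine ⟨hinv, ?_⟩
  intro c hc
  have hlt := pvFree_lt g c hc
  have hp : (c.1.toNat, c.2.toNat) ∈ pvPos g.length := (pvMem_pvPos g.length _).2 hlt
  have hfree' : pvFree g ((c.1.toNat : Int), (c.2.toNat : Int)) := by
    rwa [pvCellRebuild c hc.1 hc.2.2.1]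
  have hm := hcov _ hp hfree'
  have := (hinv.miff c.1.toNat c.2.toNat).1 hm
  rwa [pvCellRebuild c hc.1 hc.2.2.1] at this

lemma pvFoldl_const_add {α : Type} :
    ∀ (l : List α) (a t0 : Int), l.foldl (fun t _ => t + a) t0 = t0 + l.length * a := by
  intro l
  induction l with
  | nil => intro a t0; simp
  | cons x t ih =>
    intro a t0
    rw [List.foldl_cons, ih, List.length_cons]
    push_cast
    ring

lemma sumRemoteness_eq (g : List (List Int)) :
    sumRemoteness g =
      ((pvOuter g g.length).2.map
        (fun pc => (pc.1.length : Int) * (pvGridSum g g.length - pc.2))).sum := by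
  show ((pvOuter g g.length).2.foldl (fun t c =>
      c.1.foldl (fun t _ => t + (pvGridSum g g.length - c.2)) t) 0) = _
  have hc := PySem.List.foldl_congr_mem
    (l := (pvOuter g g.length).2) (init := (0 : Int))
    (f := fun t c => c.1.foldl (fun t _ => t + (pvGridSum g g.length - c.2)) t)
    (g := fun t c => t + (c.1.length : Int) * (pvGridSum g g.length - c.2))
    (by intro acc x _
        exact pvFoldl_const_add x.1 (pvGridSum g g.length - x.2) acc)
  rw [hc, PySem.List.foldl_add]
  simp

lemma sumRemoteness_alt_eq (g : List (List Int)) :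
    sumRemoteness_alt g =
      ((((pvPos g.length).filter (fun p => decide (pvValN g p.1 p.2 ≠ -1))).map
        (fun p => (pvInit g g.length).2 -
          (pvUF g g.length (pvInit g g.length).1).2.getD
            (pvFindR (pvUF g g.length (pvInit g g.length).1).1 (p.1 * g.length + p.2)) 0)).sum) := by
  show (List.range g.length).foldl (fun t i => (List.range g.length).foldl (fun t j =>
      if pvValN g i j ≠ -1 then
        t + ((pvInit g g.length).2 -
          (pvUF g g.length (pvInit g g.length).1).2.getD
            (pvFindR (pvUF g g.length (pvInit g g.length).1).1 (i * g.length + j)) 0)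
      else t) t) 0 = _
  rw [pvNested_foldl g.length (fun t i j =>
    if pvValN g i j ≠ -1 then
      t + ((pvInit g g.length).2 -
        (pvUF g g.length (pvInit g g.length).1).2.getD
          (pvFindR (pvUF g g.length (pvInit g g.length).1).1 (i * g.length + j)) 0)
    else t) 0]
  rw [pvFoldl_if_add (fun p : Nat × Nat => pvValN g p.1 p.2 ≠ -1)
    (fun p : Nat × Nat => (pvInit g g.length).2 -
      (pvUF g g.length (pvInit g g.length).1).2.getD
        (pvFindR (pvUF g g.length (pvInit g g.length).1).1 (p.1 * g.length + p.2)) 0)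
    (pvPos g.length) 0]
  simp


-- ---------- union-find final state ----------

lemma pvUF_final (g : List (List Int)) :
    ∃ E', pvUInv g (pvUF g g.length (pvInit g g.length).1).1
        (pvUF g g.length (pvInit g g.length).1).2 E' ∧
      (∀ x y, Relation.EqvGen (pvERel E') x y ↔ Relation.EqvGen (pvAdjId g) x y) := by
  rw [pvUF_eq]
  obtain ⟨E', hinv, hsound, hcov, _⟩ := pvUF_fold_spec g (pvPos g.length) []
    (List.range (g.length * g.length), (pvInit g g.length).1) []
    (fun q hq => (pvMem_pvPos g.length q).1 hq) (pvUInv_init g)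
    (by intro e he; exact absurd he (by simp))
    (by intro i j hmem; exact absurd hmem (by simp))
  refine ⟨E', hinv, ?_⟩
  have hcomp := pvCover_complete g E' (show pvCoverE g (pvPos g.length) E' from hcov)
  intro x y
  constructor
  · apply pvEqvGen_mono (fun u v huv => ?_) x y
    rcases huv with h | h
    · exact Relation.EqvGen.rel _ _ (hsound (u, v) h)
    · exact Relation.EqvGen.symm _ _ (Relation.EqvGen.rel _ _ (hsound (v, u) h))
  · apply pvEqvGen_mono (fun u v huv => ?_) x y
    exact Relation.EqvGen.rel _ _ (hcomp u v huv)

-- ---------- class sums match component sums ----------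

lemma pvClass_eq_comp (g : List (List Int)) (p' : List Nat) (cs' : List Int)
    (E' : List (Nat × Nat)) (hinv : pvUInv g p' cs' E')
    (hEiff : ∀ x y, Relation.EqvGen (pvERel E') x y ↔ Relation.EqvGen (pvAdjId g) x y)
    (C : List (Int × Int)) (s0 : Int × Int) (hs0 : pvFree g s0)
    (hC : ∀ d, d ∈ C ↔ pvConn g s0 d) (hnd : C.Nodup)
    (c : Int × Int) (hc : c ∈ C) :
    cs'.getD (pvFindR p' (c.1.toNat * g.length + c.2.toNat)) 0
      = (C.map (fun e => pvVal g e.1 e.2)).sum := by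
  have hcfree : pvFree g c := pvConn_free_right g s0 c ((hC c).1 hc) hs0
  obtain ⟨hknode, hkcell⟩ := pvFree_node g c hcfree
  have hroot := pvFindR_is_root p' hinv.mono (c.1.toNat * g.length + c.2.toNat)
  rw [hinv.csum _ hroot]
  -- characterize membership in the class of c
  have hchar : ∀ k' : Nat, pvNodeB g k' = true →
      (pvFindR p' k' = pvFindR p' (c.1.toNat * g.length + c.2.toNat) ↔
        pvConn g (pvCellOf g k') c) := by
    intro k' hk'
    rw [hinv.req, hEiff]
    constructor
    · intro h
      have := pvEqvgen_to_conn g _ _ h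
      rwa [hkcell] at this
    · intro h
      have hk'free : pvFree g (pvCellOf g k') := ((pvNodeB_iff g k').1 hk').1
      have := pvConn_to_eqvgen g (pvCellOf g k') c h hk'free
      have hid : (pvCellOf g k').1.toNat * g.length + (pvCellOf g k').2.toNat = k' := by
        unfold pvCellOf
        simp only [Int.toNat_natCast]
        exact pvId_cellOf g k' ((pvNodeB_iff g k').1 hk').2
      rwa [hid] at this
  -- the filtered id list, mapped to cells, is a permutation of C
  have hLnodup : ((List.range (g.length * g.length)).filter
      (fun k => pvNodeB g k && (pvFindR p' k ==
        pvFindR p' (c.1.toNat * g.length + c.2.toNat)))).Nodup :=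
    List.Nodup.filter _ (List.nodup_range)
  have hmemL : ∀ k' : Nat, k' ∈ (List.range (g.length * g.length)).filter
      (fun k => pvNodeB g k && (pvFindR p' k ==
        pvFindR p' (c.1.toNat * g.length + c.2.toNat))) ↔
      (k' < g.length * g.length ∧ pvNodeB g k' = true ∧
        pvFindR p' k' = pvFindR p' (c.1.toNat * g.length + c.2.toNat)) := by
    intro k'
    simp [List.mem_filter, and_assoc]
  have hperm : (((List.range (g.length * g.length)).filter
      (fun k => pvNodeB g k && (pvFindR p' k ==
        pvFindR p' (c.1.toNat * g.length + c.2.toNat)))).map (pvCellOf g)).Perm C := by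
    apply (List.perm_ext_iff_of_nodup ?_ hnd).2
    · intro d
      rw [List.mem_map]
      constructor
      · rintro ⟨k', hk', rfl⟩
        rw [hmemL k'] at hk'
        obtain ⟨hkN, hknode', hkfind⟩ := hk'
        have hconn : pvConn g (pvCellOf g k') c := (hchar k' hknode').1 hkfind
        rw [hC]
        exact Relation.ReflTransGen.trans ((hC c).1 hc) (pvConn_symm g hconn)
      · intro hd
        have hdconn := (hC d).1 hd
        have hdfree : pvFree g d := pvConn_free_right g s0 d hdconn hs0
        obtain ⟨hdnode, hdcell⟩ := pvFree_node g d hdfree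
        refine ⟨d.1.toNat * g.length + d.2.toNat, ?_, hdcell⟩
        rw [hmemL]
        have hdlt := pvFree_lt g d hdfree
        refine ⟨pvId_lt _ _ _ hdlt.1 hdlt.2, hdnode, ?_⟩
        apply (hchar _ hdnode).2
        rw [hdcell]
        exact Relation.ReflTransGen.trans (pvConn_symm g hdconn) ((hC c).1 hc)
    · apply (List.nodup_map_iff_inj_on hLnodup).mpr
      intro x hx y hy hxy
      rw [hmemL] at hx hy
      have hx' := pvId_cellOf g x hx.1
      have hy' := pvId_cellOf g y hy.1
      unfold pvCellOf at hxy
      have h1 : x / g.length = y / g.length := by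
        have h := (Prod.ext_iff.1 hxy).1
        simp only at h
        exact_mod_cast h
      have h2 : x % g.length = y % g.length := by
        have h := (Prod.ext_iff.1 hxy).2
        simp only at h
        exact_mod_cast h
      have h3 : x / g.length * g.length = y / g.length * g.length := by rw [h1]
      omega
  -- transport the sum along the permutation
  unfold pvClassSum
  have hmm : ((List.range (g.length * g.length)).filter
      (fun k => pvNodeB g k && (pvFindR p' k ==
        pvFindR p' (c.1.toNat * g.length + c.2.toNat)))).map
      (fun k => pvValN g (k / g.length) (k % g.length))
      = (((List.range (g.length * g.length)).filter
      (fun k => pvNodeB g k && (pvFindR p' k ==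
        pvFindR p' (c.1.toNat * g.length + c.2.toNat)))).map (pvCellOf g)).map
        (fun e => pvVal g e.1 e.2) := by
    rw [List.map_map]
    apply List.map_eq_map_iff.mpr
    intro k' _
    simp only [Function.comp_apply]
    unfold pvCellOf
    rw [pvVal_natCast]
  rw [hmm]
  exact List.Perm.sum_eq (List.Perm.map _ hperm)

-- ---------- summing over all components ----------

lemma pvSum_over_comps (h : (Int × Int) → Int) :
    ∀ (comps : List (List (Int × Int) × Int)),
      (comps.map (fun pc => (pc.1.map h).sum)).sum
        = ((comps.flatMap (fun pc => pc.1)).map h).sum := by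
  intro comps
  induction comps with
  | nil => simp
  | cons pc t ih => simp [List.flatMap_cons, List.map_append, List.sum_append, ih]


lemma pvMain (g : List (List Int)) : sumRemoteness g = sumRemoteness_alt g := by
  obtain ⟨hOinv, hOcov⟩ := pvOuter_spec g
  obtain ⟨E', hUinv, hEiff⟩ := pvUF_final g
  rw [sumRemoteness_eq, sumRemoteness_alt_eq]
  -- rewrite each component term as a per-cell sum
  have hstep1 : (pvOuter g g.length).2.map
      (fun pc => (pc.1.length : Int) * (pvGridSum g g.length - pc.2))
      = (pvOuter g g.length).2.map (fun pc => (pc.1.map (fun c => pvGridSum g g.length -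
          (pvUF g g.length (pvInit g g.length).1).2.getD
            (pvFindR (pvUF g g.length (pvInit g g.length).1).1
              (c.1.toNat * g.length + c.2.toNat)) 0)).sum) := by
    apply List.map_eq_map_iff.mpr
    intro pc hpc
    obtain ⟨hnd, ⟨s0, hs0free, hmem⟩, hsum⟩ := hOinv.comps pc hpc
    have hmapc : pc.1.map (fun c => pvGridSum g g.length -
        (pvUF g g.length (pvInit g g.length).1).2.getD
          (pvFindR (pvUF g g.length (pvInit g g.length).1).1
            (c.1.toNat * g.length + c.2.toNat)) 0)
        = pc.1.map (fun _ => pvGridSum g g.length - pc.2) := by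
      apply List.map_eq_map_iff.mpr
      intro c hcmem
      have hcl := pvClass_eq_comp g (pvUF g g.length (pvInit g g.length).1).1
        (pvUF g g.length (pvInit g g.length).1).2 E' hUinv hEiff pc.1 s0 hs0free hmem hnd
        c hcmem
      rw [hcl, hsum]
    rw [hmapc]
    simp [List.map_const', List.sum_replicate]
  rw [hstep1, pvSum_over_comps]
  -- the flattened component cells are a permutation of the free positions
  have hperm : ((pvOuter g g.length).2.flatMap (fun pc => pc.1)).Perm
      (((pvPos g.length).filter (fun p => decide (pvValN g p.1 p.2 ≠ -1))).map
        (fun p => (((p.1 : Nat) : Int), ((p.2 : Nat) : Int)))) := by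
    have hnodL : ((pvOuter g g.length).2.flatMap (fun pc => pc.1)).Nodup := by
      rw [List.nodup_flatMap]
      constructor
      · intro pc hpc
        exact (hOinv.comps pc hpc).1
      · refine List.Pairwise.imp ?_ hOinv.disj
        intro pc qc hd
        intro d hdp hdq
        exact hd d hdp hdq
    have hnodR : (((pvPos g.length).filter
        (fun p => decide (pvValN g p.1 p.2 ≠ -1))).map
        (fun p => (((p.1 : Nat) : Int), ((p.2 : Nat) : Int)))).Nodup := by
      apply (List.nodup_map_iff_inj_on (List.Nodup.filter _ (pvNodup_pvPos g.length))).mpr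
      intro x _ y _ hxy
      obtain ⟨h1, h2⟩ := Prod.ext_iff.1 hxy
      simp only at h1 h2
      rw [Prod.ext_iff]
      exact ⟨by exact_mod_cast h1, by exact_mod_cast h2⟩
    apply (List.perm_ext_iff_of_nodup hnodL hnodR).2
    intro c
    rw [List.mem_flatMap, List.mem_map]
    constructor
    · rintro ⟨pc, hpc, hcmem⟩
      obtain ⟨_, ⟨s0, hs0free, hmem⟩, _⟩ := hOinv.comps pc hpc
      have hcfree : pvFree g c := pvConn_free_right g s0 c ((hmem c).1 hcmem) hs0free
      refine ⟨(c.1.toNat, c.2.toNat), ?_, pvCellRebuild c hcfree.1 hcfree.2.2.1⟩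
      rw [List.mem_filter]
      have hlt := pvFree_lt g c hcfree
      refine ⟨(pvMem_pvPos g.length _).2 hlt, ?_⟩
      simp only [decide_eq_true_eq]
      have := hcfree.2.2.2.2
      rwa [show pvVal g c.1 c.2 = pvValN g c.1.toNat c.2.toNat from rfl] at this
    · rintro ⟨p, hp, rfl⟩
      rw [List.mem_filter] at hp
      obtain ⟨hpos, hval⟩ := hp
      rw [pvMem_pvPos] at hpos
      simp only [decide_eq_true_eq] at hval
      have hfree : pvFree g (((p.1 : Nat) : Int), ((p.2 : Nat) : Int)) := by
        refine ⟨by positivity, by exact_mod_cast Nat.cast_lt.2 hpos.1, by positivity,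
          by exact_mod_cast Nat.cast_lt.2 hpos.2, ?_⟩
        rw [pvVal_natCast]
        exact hval
      obtain ⟨pc, hpc, hcm⟩ := hOcov _ hfree
      exact ⟨pc, hpc, hcm⟩
  rw [List.Perm.sum_eq (List.Perm.map _ hperm)]
  rw [List.map_map]
  apply congrArg
  apply List.map_eq_map_iff.mpr
  intro p _
  simp only [Function.comp_apply, Int.toNat_natCast]
  rw [pvInit_snd]

-- ===== VERDICT (by name: the statement is the Claim_ definition above) =====
theorem sumRemoteness_spec : Claim_equal_sumRemoteness := by
  unfold Claim_equal_sumRemoteness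
  intro g _ _
  unfold Spec_sumRemoteness
  exact pvMain g
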